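-- pv_equiv track=rewrite | github.com/Just-NB/Algorithm | Baekjoon/2022/Jan/03/1005.py | top_sorting
-- ===== SOURCE A (Python) =====
-- import heapq
--
-- def top_sorting(N, D, graph, parent):
--     ret = [0] * (N + 1)
--     start = []
--     for i, p in enumerate(parent):
--         if p == 0:
--             start.append(i)
--
--     heap = []
--     for s in start:
--         heapq.heappush(heap, (D[s-1], s)) # 누적 값, 노드 번호
--
--     while len(heap) != 0:
--         time, node = heapq.heappop(heap)
--         parent[node] -= 1
--
--         if parent[node] <= 0: # 순서가 됬다면.
--             ret[node] = time
--             for child in graph[node]: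
--                 heapq.heappush(heap, (time+D[child-1], child))
--     return ret
-- ===== SOURCE B (Python) =====
-- def top_sorting(N, D, graph, parent):
--     # Kahn topological order: plain FIFO list queue, indeg countdown, max-finish-time DP.
--     indeg = list(parent)
--     best = [0] * (N + 1)
--     ret = [0] * (N + 1)
--     queue = [v for v in range(len(indeg)) if indeg[v] == 0]
--     head = 0
--     while head < len(queue):
--         v = queue[head]
--         head += 1
--         t = best[v] + D[v - 1]
--         ret[v] = t
--         for c in graph[v]:
--             if t > best[c]:
--                 best[c] = t
--             indeg[c] -= 1
--             if indeg[c] == 0: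
--                 queue.append(c)
--     return ret
-- ===== Notes on version B (the rewrite author's own statement) =====
-- stated objective: alternative
-- what changed: A simulates the schedule event-by-event with a heapq priority queue keyed by accumulated time; B is Kahn's topological sort with a plain FIFO list queue and a max-finish-time DP (best[] of predecessor finish times, indeg countdown), removing the heap and its ordering entirely; Pre_ excludes inputs where A raises or loops forever (bad lengths/indices, self-feeding counters) and inputs whose value is an artefact of A's heap schedule (parent counters inconsistent with the graph's in-degrees, negative durations).
import Mathlib
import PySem

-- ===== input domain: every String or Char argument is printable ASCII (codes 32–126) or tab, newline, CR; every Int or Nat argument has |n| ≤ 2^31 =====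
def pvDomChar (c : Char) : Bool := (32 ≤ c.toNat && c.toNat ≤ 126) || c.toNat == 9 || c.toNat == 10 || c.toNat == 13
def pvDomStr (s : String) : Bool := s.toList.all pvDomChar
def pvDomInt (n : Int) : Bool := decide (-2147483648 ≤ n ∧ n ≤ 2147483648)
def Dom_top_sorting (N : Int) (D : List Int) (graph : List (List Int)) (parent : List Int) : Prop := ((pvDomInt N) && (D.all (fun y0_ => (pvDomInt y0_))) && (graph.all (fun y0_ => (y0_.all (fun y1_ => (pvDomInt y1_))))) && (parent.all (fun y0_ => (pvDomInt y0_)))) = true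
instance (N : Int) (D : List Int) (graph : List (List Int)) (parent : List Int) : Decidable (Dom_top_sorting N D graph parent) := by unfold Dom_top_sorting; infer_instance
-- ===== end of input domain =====

-- B replaces A's priority-queue event simulation by Kahn's topological sort with a plain
-- FIFO queue and a max-finish-time DP (no heap and no ordering by time); equivalence is
-- about the RETURN value only: A additionally mutates `parent` in place, B does not.

-- ===== PORT A =====
-- heapq.heappop returns the lexicographically least (time, node) pair; we model the heap as
-- a list, popping the least element (equal pairs are identical, so which copy is popped is
-- unobservable).
def pvPairLt (a b : Int × Int) : Bool := a.1 < b.1 || (a.1 == b.1 && a.2 < b.2)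

def pvHeapMin : Int × Int → List (Int × Int) → Int × Int
  | m, [] => m
  | m, x :: xs => pvHeapMin (if pvPairLt x m then x else m) xs

-- the while-loop of A; fuel bounds the number of iterations (inside Pre_ the loop pops at
-- most (N+1) + total-edge-count entries, see pvFuel below)
def pvLoopA (D : List Int) (graph : List (List Int)) :
    Nat → List Int → List Int → List (Int × Int) → List Int
  | 0, ret, _, _ => ret
  | _ + 1, ret, _, [] => ret
  | fuel + 1, ret, par, x :: xs =>
      let m := pvHeapMin x xs
      let heap1 := (x :: xs).erase m
      let par1 := PySem.List.pySetD par m.2 (PySem.List.pyGetD par m.2 0 - 1)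
      if PySem.List.pyGetD par1 m.2 0 ≤ 0 then
        let ret1 := PySem.List.pySetD ret m.2 m.1
        let heap2 := (PySem.List.pyGetD graph m.2 []).foldl
          (fun h c => h ++ [(m.1 + PySem.List.pyGetD D (c - 1) 0, c)]) heap1
        pvLoopA D graph fuel ret1 par1 heap2
      else pvLoopA D graph fuel ret par1 heap1

def pvFuel (N : Int) (graph : List (List Int)) : Nat :=
  (N + 1).toNat + graph.foldl (fun a l => a + l.length) 0 + 1

def top_sorting (N : Int) (D : List Int) (graph : List (List Int)) (parent : List Int) : List Int :=
  let ret := List.replicate (N + 1).toNat 0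
  let start := (PySem.List.enumerate parent 0).foldl
    (fun acc ip => if ip.2 = 0 then acc ++ [ip.1] else acc) []
  let heap := start.foldl (fun h s => h ++ [(PySem.List.pyGetD D (s - 1) 0, s)]) []
  pvLoopA D graph (pvFuel N graph) ret parent heap

-- ===== PORT B =====
-- body of B's inner `for c in graph[v]` loop; state = (best, indeg, appended-to-queue)
def pvEdgeStep (t : Int) (s : List Int × List Int × List Int) (c : Int) :
    List Int × List Int × List Int :=
  let best := if t > PySem.List.pyGetD s.1 c 0 then PySem.List.pySetD s.1 c t else s.1
  let indeg := PySem.List.pySetD s.2.1 c (PySem.List.pyGetD s.2.1 c 0 - 1)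
  let app := if PySem.List.pyGetD indeg c 0 == 0 then s.2.2 ++ [c] else s.2.2
  (best, indeg, app)

-- B's while-loop over the FIFO queue; the pending argument is queue[head:], appends go to
-- its back; fuel bounds the number of pops (inside Pre_ each node is enqueued at most once)
def pvLoopB (D : List Int) (graph : List (List Int)) :
    Nat → List Int → List Int → List Int → List Int → List Int
  | 0, _, _, ret, _ => ret
  | _ + 1, _, _, ret, [] => ret
  | fuel + 1, indeg, best, ret, v :: rest =>
      let t := PySem.List.pyGetD best v 0 + PySem.List.pyGetD D (v - 1) 0
      let ret1 := PySem.List.pySetD ret v t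
      let r := (PySem.List.pyGetD graph v []).foldl (pvEdgeStep t) (best, indeg, [])
      pvLoopB D graph fuel r.2.1 r.1 ret1 (rest ++ r.2.2)

def top_sorting_alt (N : Int) (D : List Int) (graph : List (List Int)) (parent : List Int) : List Int :=
  let indeg := parent
  let best := List.replicate (N + 1).toNat 0
  let ret := List.replicate (N + 1).toNat 0
  let queue := (PySem.List.pyRange 0 (PySem.List.len indeg) 1).filter
    (fun v => PySem.List.pyGetD indeg v 0 == 0)
  pvLoopB D graph ((N + 1).toNat + 1) indeg best ret queue

-- ===== PRECONDITION & SPEC =====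
-- Pre_ admits (i) every input whose `parent` has no zero entry (A builds no work list and
-- returns all zeros), and (ii) well-formed instances: N ≥ 1, |D| = N, |graph| = |parent| =
-- N+1, every edge target in [1,N], durations nonnegative, and parent[v] equal to v's
-- in-degree.  Pre_ excludes inputs where A raises (bad lengths/indices) or loops forever
-- (self-feeding counters), and inputs on which A returns a value that is an artefact of its
-- heap schedule: parent counters inconsistent with the graph's in-degrees (nodes starve or
-- fire repeatedly) and negative durations (popping by time no longer realises the maximum).
def Pre_top_sorting (N : Int) (D : List Int) (graph : List (List Int)) (parent : List Int) : Prop :=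
  (∀ p ∈ parent, p ≠ 0) ∨
  (1 ≤ N ∧ (D.length : Int) = N ∧ (graph.length : Int) = N + 1 ∧ (parent.length : Int) = N + 1 ∧
    (∀ l ∈ graph, ∀ c ∈ l, 1 ≤ c ∧ c ≤ N) ∧ (∀ x ∈ D, 0 ≤ x) ∧
    (∀ v ∈ PySem.List.pyRange 0 (N + 1) 1,
      PySem.List.pyGetD parent v 0 =
        ((PySem.List.pyRange 0 (N + 1) 1).map
          (fun u => ((PySem.List.pyGetD graph u []).count v : Int))).sum))

instance (N : Int) (D : List Int) (graph : List (List Int)) (parent : List Int) :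
    Decidable (Pre_top_sorting N D graph parent) := by unfold Pre_top_sorting; infer_instance

def pvWitness_top_sorting : Int × List Int × List (List Int) × List Int :=
  (2, [3, 1], [[], [2], []], [0, 0, 1])

def Spec_top_sorting (N : Int) (D : List Int) (graph : List (List Int)) (parent : List Int) (out : List Int) : Prop := out = top_sorting_alt N D graph parent
instance (N : Int) (D : List Int) (graph : List (List Int)) (parent : List Int) (out : List Int) : Decidable (Spec_top_sorting N D graph parent out) := by unfold Spec_top_sorting; infer_instance

-- ===== CLAIM (what is proved, stated in full; the proofs are below) =====
def Claim_equal_top_sorting : Prop := ∀ (N : Int) (D : List Int) (graph : List (List Int)) (parent : List Int), Dom_top_sorting N D graph parent → Pre_top_sorting N D graph parent → Spec_top_sorting N D graph parent (top_sorting N D graph parent)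

-- ===== LEMMAS AND PROOFS =====

-- ---------- generic helpers ----------

structure PvWF (N : Int) (D : List Int) (graph : List (List Int)) (parent : List Int) : Prop where
  hN : 1 ≤ N
  hD : (D.length : Int) = N
  hG : (graph.length : Int) = N + 1
  hP : (parent.length : Int) = N + 1
  hC : ∀ l ∈ graph, ∀ c ∈ l, 1 ≤ c ∧ c ≤ N
  hDpos : ∀ x ∈ D, 0 ≤ x
  hInd : ∀ v ∈ PySem.List.pyRange 0 (N + 1) 1,
    PySem.List.pyGetD parent v 0 =
      ((PySem.List.pyRange 0 (N + 1) 1).map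
        (fun u => ((PySem.List.pyGetD graph u []).count v : Int))).sum

theorem pvGetOut {α : Type} (xs : List α) (v : Int) (d : α)
    (h : ¬ (-(xs.length : Int) ≤ v ∧ v < xs.length)) :
    PySem.List.pyGetD xs v d = d := by
  apply PySem.List.pyGetD_of_none
  rw [PySem.List.pyGet?_eq_none_iff]
  intro hc
  exact h (by simpa [PySem.Raise.InRange] using hc)

theorem pvGetSet {α : Type} (xs : List α) (i v : Int) (x d : α)
    (hi0 : 0 ≤ i) (hil : i < xs.length) (hv0 : 0 ≤ v) :
    PySem.List.pyGetD (PySem.List.pySetD xs i x) v d =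
      if v = i then x else PySem.List.pyGetD xs v d := by
  rw [PySem.List.pySetD_of_nonneg xs x hi0]
  by_cases hvl : v < xs.length
  · rw [PySem.List.pyGetD_eq_getElem _ _ hv0 (by simpa using hvl),
      PySem.List.pyGetD_eq_getElem _ _ hv0 hvl, List.getElem_set]
    have hiff : i.toNat = v.toNat ↔ v = i := by omega
    split_ifs with h1 h2 h2
    · rfl
    · exact absurd (hiff.mp h1) h2
    · exact absurd (hiff.mpr h2) h1
    · rfl
  · have hne : ¬ v = i := by omega
    rw [if_neg hne, pvGetOut _ _ _ (by simp; omega), pvGetOut _ _ _ (by omega)]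

theorem pvGetMem {α : Type} (xs : List α) (v : Int) (d : α)
    (hv0 : 0 ≤ v) (hvl : v < xs.length) :
    PySem.List.pyGetD xs v d ∈ xs := by
  apply PySem.List.pyGetD_mem
  simp [PySem.Raise.InRange]; omega

-- max of a list with first element as seed (Python max over a nonempty list)
def pvMaxD : List Int → Int
  | [] => 0
  | h :: t => t.foldl max h

theorem pvFoldlMax_init_le (t : List Int) : ∀ h : Int, h ≤ t.foldl max h := by
  induction t with
  | nil => simp
  | cons a t ih => intro h; exact le_trans (le_max_left _ a) (ih _)

theorem pvFoldlMax_le (t : List Int) : ∀ h x : Int, x ∈ t → x ≤ t.foldl max h := by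
  induction t with
  | nil => intro _ _ hx; cases hx
  | cons a t ih =>
    intro h x hx
    rcases List.mem_cons.mp hx with hx | hx
    · subst hx; exact le_trans (le_max_right h x) (pvFoldlMax_init_le t _)
    · exact ih _ _ hx

theorem pvFoldlMax_mem (t : List Int) : ∀ h : Int, t.foldl max h = h ∨ t.foldl max h ∈ t := by
  induction t with
  | nil => simp
  | cons a t ih =>
    intro h
    rcases ih (max h a) with hc | hc
    · rcases max_cases h a with ⟨hm, _⟩ | ⟨hm, _⟩
      · left; simp only [List.foldl_cons]; rw [hc, hm]
      · right; simp only [List.foldl_cons]; rw [hc, hm]; exact List.mem_cons_self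
    · right; simp only [List.foldl_cons]; exact List.mem_cons_of_mem _ hc

theorem pv_le_MaxD (l : List Int) (x : Int) (hx : x ∈ l) : x ≤ pvMaxD l := by
  cases l with
  | nil => cases hx
  | cons h t =>
    rcases List.mem_cons.mp hx with hx | hx
    · subst hx; exact pvFoldlMax_init_le t x
    · exact pvFoldlMax_le t h x hx

theorem pvMaxD_mem (l : List Int) (hl : l ≠ []) : pvMaxD l ∈ l := by
  cases l with
  | nil => exact absurd rfl hl
  | cons h t =>
    show t.foldl max h ∈ h :: t
    rcases pvFoldlMax_mem t h with hc | hc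
    · rw [hc]; exact List.mem_cons_self
    · exact List.mem_cons_of_mem _ hc

-- max of a list with default 0 (value of B's `best` accumulators)
def pvMax0 (l : List Int) : Int := l.foldr max 0

theorem pvMax0_nonneg (l : List Int) : 0 ≤ pvMax0 l := by
  induction l with
  | nil => exact le_refl 0
  | cons a t ih => exact le_trans ih (le_max_right a _)

theorem le_pvMax0 (l : List Int) (x : Int) (hx : x ∈ l) : x ≤ pvMax0 l := by
  induction l with
  | nil => cases hx
  | cons a t ih =>
    rcases List.mem_cons.mp hx with h | h
    · subst h; exact le_max_left _ _
    · exact le_trans (ih h) (le_max_right a _)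

theorem pvMax0_le (l : List Int) (m : Int) (h0 : 0 ≤ m) (h : ∀ x ∈ l, x ≤ m) :
    pvMax0 l ≤ m := by
  induction l with
  | nil => exact h0
  | cons a t ih =>
    exact max_le (h a List.mem_cons_self) (ih (fun x hx => h x (List.mem_cons_of_mem _ hx)))

theorem pvMax0_eq_pvMaxD (l : List Int) (h : ∀ x ∈ l, 0 ≤ x) : pvMax0 l = pvMaxD l := by
  cases l with
  | nil => rfl
  | cons a t =>
    have hne : a :: t ≠ [] := by simp
    have hmem := pvMaxD_mem (a :: t) hne
    apply le_antisymm
    · exact pvMax0_le _ _ (h _ hmem) (fun x hx => pv_le_MaxD _ x hx)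
    · exact le_pvMax0 _ _ hmem

theorem pvCountP_eq_one_unique {α : Type} [DecidableEq α] (l : List α) (p : α → Bool)
    (hc : l.countP p = 1) {a b : α} (ha : a ∈ l) (hb : b ∈ l)
    (hpa : p a) (hpb : p b) : a = b := by
  by_contra hne
  obtain ⟨l1, l2, _, hl, _⟩ := List.exists_erase_eq ha
  subst hl
  have hb' : b ∈ l1 ∨ b ∈ l2 := by
    rcases List.mem_append.mp hb with h | h
    · exact Or.inl h
    · rcases List.mem_cons.mp h with h | h
      · exact absurd h.symm hne
      · exact Or.inr h
  have h1 : (l1 ++ a :: l2).countP p = l1.countP p + (1 + l2.countP p) := by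
    simp [List.countP_append, List.countP_cons, hpa]
    omega
  rcases hb' with h | h
  · have hpos : 0 < l1.countP p := List.countP_pos_iff.mpr ⟨b, h, hpb⟩
    omega
  · have hpos : 0 < l2.countP p := List.countP_pos_iff.mpr ⟨b, h, hpb⟩
    omega

theorem pvPerm_filter_mem {α : Type} [DecidableEq α] (S R : List α)
    (hS : S.Nodup) (hR : R.Nodup) (hsub : ∀ x ∈ S, x ∈ R) :
    (R.filter (fun x => decide (x ∈ S))).Perm S := by
  apply List.perm_of_nodup_nodup_toFinset_eq (hR.filter _) hS
  ext x
  simp only [List.mem_toFinset, List.mem_filter, decide_eq_true_eq]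
  exact ⟨fun h => h.2, fun h => ⟨hsub x h, h⟩⟩

theorem pvSum_split {α : Type} [DecidableEq α] (R S : List α) (f : α → Nat) :
    (R.map f).sum = ((R.filter (fun x => decide (x ∈ S))).map f).sum +
      ((R.filter (fun x => !decide (x ∈ S))).map f).sum := by
  induction R with
  | nil => rfl
  | cons a R ih =>
    by_cases h : a ∈ S <;> simp [List.filter_cons, h, ih] <;> omega

theorem pvSum_le {α : Type} [DecidableEq α] (S R : List α) (f : α → Nat)
    (hS : S.Nodup) (hR : R.Nodup) (hsub : ∀ x ∈ S, x ∈ R) :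
    (S.map f).sum ≤ (R.map f).sum := by
  have hperm := pvPerm_filter_mem S R hS hR hsub
  have heq : ((R.filter (fun x => decide (x ∈ S))).map f).sum = (S.map f).sum :=
    (hperm.map f).sum_eq
  rw [pvSum_split R S f, heq]
  omega

theorem pvSum_eq {α : Type} [DecidableEq α] (S R : List α) (f : α → Nat)
    (hS : S.Nodup) (hR : R.Nodup) (hsub : ∀ x ∈ S, x ∈ R)
    (hall : ∀ x ∈ R, f x ≠ 0 → x ∈ S) :
    (S.map f).sum = (R.map f).sum := by
  have hperm := pvPerm_filter_mem S R hS hR hsub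
  have heq : ((R.filter (fun x => decide (x ∈ S))).map f).sum = (S.map f).sum :=
    (hperm.map f).sum_eq
  have hz : ((R.filter (fun x => !decide (x ∈ S))).map f).sum = 0 := by
    apply List.sum_eq_zero
    intro y hy
    simp only [List.mem_map, List.mem_filter, Bool.not_eq_true', decide_eq_false_iff_not] at hy
    obtain ⟨x, ⟨hxR, hxS⟩, rfl⟩ := hy
    by_contra hne
    exact hxS (hall x hxR hne)
  rw [pvSum_split R S f, heq, hz]
  omega

theorem pvSum_support {α : Type} [DecidableEq α] (S R : List α) (f : α → Nat)
    (hS : S.Nodup) (hR : R.Nodup) (hsub : ∀ x ∈ S, x ∈ R)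
    (heq : (S.map f).sum = (R.map f).sum) :
    ∀ x ∈ R, f x ≠ 0 → x ∈ S := by
  intro x hxR hfx
  have hperm := pvPerm_filter_mem S R hS hR hsub
  have heq2 : ((R.filter (fun x => decide (x ∈ S))).map f).sum = (S.map f).sum :=
    (hperm.map f).sum_eq
  have hsplit := pvSum_split R S f
  have hz : ((R.filter (fun x => !decide (x ∈ S))).map f).sum = 0 := by omega
  by_contra hxS
  have hmem : x ∈ R.filter (fun x => !decide (x ∈ S)) := by
    simp [List.mem_filter, hxR, hxS]
  exact hfx (List.sum_eq_zero_iff.mp hz (f x) (List.mem_map.mpr ⟨x, hmem, rfl⟩))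

-- ---------- graph notation shared by both analyses ----------

def pvRangeN (N : Int) : List Int := PySem.List.pyRange 0 (N + 1) 1

def pvGA (graph : List (List Int)) (u : Int) : List Int := PySem.List.pyGetD graph u []

def pvCnt (graph : List (List Int)) (u v : Int) : Nat := (pvGA graph u).count v

def pvDegN (N : Int) (graph : List (List Int)) (v : Int) : Nat :=
  ((pvRangeN N).map (fun u => pvCnt graph u v)).sum

def pvD (D : List Int) (v : Int) : Int := PySem.List.pyGetD D (v - 1) 0

-- multiset of predecessors of v (u repeated once per edge u -> v)
def pvP (graph : List (List Int)) (N v : Int) : List Int :=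
  (pvRangeN N).flatMap (fun u => List.replicate (pvCnt graph u v) u)

-- sum of edge multiplicities into v from the members of S
def pvSumS (graph : List (List Int)) (S : List Int) (v : Int) : Nat :=
  (S.map (fun u => pvCnt graph u v)).sum

theorem pvMem_rangeN (N x : Int) : x ∈ pvRangeN N ↔ 0 ≤ x ∧ x < N + 1 := by
  simp [pvRangeN, PySem.List.mem_pyRange_one]

theorem pvLen_rangeN (N : Int) : (pvRangeN N).length = (N + 1).toNat := by
  simp [pvRangeN, PySem.List.length_pyRange_one]

theorem pvNodup_rangeN (N : Int) : (pvRangeN N).Nodup := by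
  simp [pvRangeN, PySem.List.nodup_pyRange_one]

theorem pvParentDeg (N : Int) (D : List Int) (graph : List (List Int)) (parent : List Int)
    (w : PvWF N D graph parent) (v : Int) (h0 : 0 ≤ v) (h1 : v < N + 1) :
    PySem.List.pyGetD parent v 0 = (pvDegN N graph v : Int) := by
  have h := w.hInd v (by simpa [pvRangeN] using (pvMem_rangeN N v).mpr ⟨h0, h1⟩)
  rw [h, pvDegN, Nat.cast_list_sum, List.map_map]
  rfl

theorem pvP_mem (N : Int) (D : List Int) (graph : List (List Int)) (parent : List Int)
    (w : PvWF N D graph parent) (v : Int) (h0 : 0 ≤ v) (h1 : v < N + 1) (u : Int) :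
    u ∈ pvP graph N v ↔ (0 ≤ u ∧ u < N + 1 ∧ pvCnt graph u v ≠ 0) := by
  unfold pvP
  simp only [List.mem_flatMap, List.mem_replicate]
  constructor
  · rintro ⟨a, ha, hn, heq⟩
    subst heq
    have := (pvMem_rangeN N u).mp ha
    exact ⟨this.1, this.2, hn⟩
  · rintro ⟨hu0, hu1, hn⟩
    exact ⟨u, (pvMem_rangeN N u).mpr ⟨hu0, hu1⟩, hn, rfl⟩

theorem pvP_nil_iff (N : Int) (D : List Int) (graph : List (List Int)) (parent : List Int)
    (w : PvWF N D graph parent) (v : Int) (h0 : 0 ≤ v) (h1 : v < N + 1) :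
    pvP graph N v = [] ↔ pvDegN N graph v = 0 := by
  unfold pvP pvDegN
  rw [List.flatMap_eq_nil_iff, List.sum_eq_zero_iff]
  constructor
  · intro h u hu
    simp only [List.mem_map] at hu
    obtain ⟨a, ha, rfl⟩ := hu
    have := h a ha
    simpa using this
  · intro h a ha
    have := h (pvCnt graph a v) (List.mem_map.mpr ⟨a, ha, rfl⟩)
    simp [this]

theorem pvSumS_nil (graph : List (List Int)) (v : Int) : pvSumS graph [] v = 0 := rfl

theorem pvSumS_append (graph : List (List Int)) (S : List Int) (x v : Int) :
    pvSumS graph (S ++ [x]) v = pvSumS graph S v + pvCnt graph x v := by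
  rw [pvSumS, pvSumS, List.map_append, List.sum_append]
  simp

theorem pvDeg_zero_cnt (N : Int) (D : List Int) (graph : List (List Int)) (parent : List Int)
    (w : PvWF N D graph parent) (v : Int)
    (hdeg : pvDegN N graph v = 0) (u : Int) (hu0 : 0 ≤ u) (hu1 : u < N + 1) :
    pvCnt graph u v = 0 :=
  List.sum_eq_zero_iff.mp hdeg (pvCnt graph u v)
    (List.mem_map.mpr ⟨u, (pvMem_rangeN N u).mpr ⟨hu0, hu1⟩, rfl⟩)

theorem pvSumS_zero (N : Int) (D : List Int) (graph : List (List Int)) (parent : List Int)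
    (w : PvWF N D graph parent) (S : List Int) (v : Int)
    (hSb : ∀ u ∈ S, 0 ≤ u ∧ u < N + 1)
    (hdeg : pvDegN N graph v = 0) : pvSumS graph S v = 0 := by
  apply List.sum_eq_zero
  intro x hx
  obtain ⟨u, hu, rfl⟩ := List.mem_map.mp hx
  exact pvDeg_zero_cnt N D graph parent w v hdeg u (hSb u hu).1 (hSb u hu).2

theorem pvSumS_le (N : Int) (D : List Int) (graph : List (List Int)) (parent : List Int)
    (S : List Int) (v : Int) (hS : S.Nodup) (hSb : ∀ u ∈ S, 0 ≤ u ∧ u < N + 1) :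
    pvSumS graph S v ≤ pvDegN N graph v :=
  pvSum_le S (pvRangeN N) (fun u => pvCnt graph u v) hS (pvNodup_rangeN N)
    (fun x hx => (pvMem_rangeN N x).mpr ⟨(hSb x hx).1, (hSb x hx).2⟩)

theorem pvSumS_full (N : Int) (D : List Int) (graph : List (List Int)) (parent : List Int)
    (S : List Int) (v : Int) (hS : S.Nodup) (hSb : ∀ u ∈ S, 0 ≤ u ∧ u < N + 1)
    (hclosed : ∀ u : Int, 0 ≤ u → u < N + 1 → pvCnt graph u v ≠ 0 → u ∈ S) :
    pvSumS graph S v = pvDegN N graph v :=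
  pvSum_eq S (pvRangeN N) (fun u => pvCnt graph u v) hS (pvNodup_rangeN N)
    (fun x hx => (pvMem_rangeN N x).mpr ⟨(hSb x hx).1, (hSb x hx).2⟩)
    (fun x hx hne => hclosed x ((pvMem_rangeN N x).mp hx).1 ((pvMem_rangeN N x).mp hx).2 hne)

theorem pvD_nonneg (N : Int) (D : List Int) (graph : List (List Int)) (parent : List Int)
    (w : PvWF N D graph parent) (v : Int) (h0 : 0 ≤ v) (h1 : v < N + 1) :
    0 ≤ pvD D v := by
  apply w.hDpos
  apply PySem.List.pyGetD_mem
  have h1' := w.hD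
  have h2' := w.hN
  constructor <;> omega

-- the order in which a run may fire its nodes
def pvOk (N : Int) (graph : List (List Int)) (parent : List Int) :
    List Int → List Int → Prop
  | _, [] => True
  | acc, v :: t =>
      (PySem.List.pyGetD parent v 0 = 0 ∨
        (pvP graph N v ≠ [] ∧ ∀ u ∈ pvP graph N v, u ∈ acc)) ∧
      pvOk N graph parent (acc ++ [v]) t

theorem pvOk_append (N : Int) (graph : List (List Int)) (parent : List Int) (v : Int) :
    ∀ (t acc : List Int), pvOk N graph parent acc t →
      (PySem.List.pyGetD parent v 0 = 0 ∨
        (pvP graph N v ≠ [] ∧ ∀ u ∈ pvP graph N v, u ∈ acc ++ t)) →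
      pvOk N graph parent acc (t ++ [v]) := by
  intro t
  induction t with
  | nil =>
    intro acc _ hcond
    exact ⟨by simpa using hcond, trivial⟩
  | cons x t ih =>
    intro acc hok hcond
    obtain ⟨hx, ht⟩ := hok
    refine ⟨hx, ih (acc ++ [x]) ht ?_⟩
    rcases hcond with h | ⟨h1, h2⟩
    · exact Or.inl h
    · refine Or.inr ⟨h1, fun u hu => ?_⟩
      have := h2 u hu
      simp only [List.append_assoc, List.mem_append, List.mem_cons] at this ⊢
      tauto

-- ---------- B-side analysis (Kahn's algorithm with max-DP) ----------

theorem pvNodupLen (N : Int) (S : List Int) (hS : S.Nodup)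
    (hSb : ∀ v ∈ S, 0 ≤ v ∧ v < N + 1) : S.length ≤ (N + 1).toNat := by
  have hsub : S ⊆ pvRangeN N := by
    intro x hx
    exact (pvMem_rangeN N x).mpr (hSb x hx)
  have := (List.subperm_of_subset hS hsub).length_le
  rwa [pvLen_rangeN N] at this

-- invariant of B's queue loop: S = popped nodes in order, Q = the pending queue
structure PvK (N : Int) (D : List Int) (graph : List (List Int)) (parent : List Int)
    (indeg best ret : List Int) (S Q : List Int) : Prop where
  nod : (S ++ Q).Nodup
  bnd : ∀ v ∈ S ++ Q, 0 ≤ v ∧ v < N + 1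
  leni : indeg.length = (N + 1).toNat
  lenb : best.length = (N + 1).toNat
  lenr : ret.length = (N + 1).toNat
  ideg : ∀ v : Int, 0 ≤ v → v < N + 1 →
    PySem.List.pyGetD indeg v 0 = PySem.List.pyGetD parent v 0 - (pvSumS graph S v : Int)
  memiff : ∀ v : Int, 0 ≤ v → v < N + 1 →
    (v ∈ S ++ Q ↔ pvSumS graph S v = pvDegN N graph v)
  bspec : ∀ v : Int, 0 ≤ v → v < N + 1 →
    PySem.List.pyGetD best v 0 =
      pvMax0 (((pvP graph N v).filter (fun u => decide (u ∈ S))).map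
        (fun u => PySem.List.pyGetD ret u 0))
  ok : pvOk N graph parent [] S
  rval : ∀ v ∈ S, PySem.List.pyGetD ret v 0 =
    pvMaxD ((pvP graph N v).map (fun u => PySem.List.pyGetD ret u 0)) + pvD D v
  rzero : ∀ v : Int, 0 ≤ v → v < N + 1 → v ∉ S → PySem.List.pyGetD ret v 0 = 0
  rpos : ∀ v ∈ S, 0 ≤ PySem.List.pyGetD ret v 0

theorem pvEdges (N t : Int) :
    ∀ (l best indeg app : List Int),
      best.length = (N + 1).toNat → indeg.length = (N + 1).toNat →
      (∀ c ∈ l, 0 ≤ c ∧ c < N + 1) →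
      (∀ c : Int, 0 ≤ c → c < N + 1 → ((l.count c : Int) ≤ PySem.List.pyGetD indeg c 0)) →
      ((l.foldl (pvEdgeStep t) (best, indeg, app)).1.length = (N + 1).toNat ∧
       (l.foldl (pvEdgeStep t) (best, indeg, app)).2.1.length = (N + 1).toNat ∧
       (∀ c : Int, 0 ≤ c → c < N + 1 →
          PySem.List.pyGetD (l.foldl (pvEdgeStep t) (best, indeg, app)).2.1 c 0
            = PySem.List.pyGetD indeg c 0 - l.count c) ∧
       (∀ c : Int, 0 ≤ c → c < N + 1 →
          PySem.List.pyGetD (l.foldl (pvEdgeStep t) (best, indeg, app)).1 c 0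
            = if 0 < l.count c then max (PySem.List.pyGetD best c 0) t
              else PySem.List.pyGetD best c 0) ∧
       (∃ A : List Int, (l.foldl (pvEdgeStep t) (best, indeg, app)).2.2 = app ++ A ∧ A.Nodup ∧
          (∀ x : Int, x ∈ A ↔
            (0 < l.count x ∧ PySem.List.pyGetD indeg x 0 = (l.count x : Int))))) := by
  intro l
  induction l with
  | nil =>
    intro best indeg app hlb hli _ _
    refine ⟨hlb, hli, ?_, ?_, [], by simp, List.nodup_nil, ?_⟩
    · intro c _ _; simp
    · intro c _ _; simp
    · intro x; simp
  | cons c0 rest ih =>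
    intro best indeg app hlb hli hbnd hcnt
    have hc0 := hbnd c0 List.mem_cons_self
    have hc0len : c0 < (indeg.length : Int) := by rw [hli]; omega
    have hc0lenb : c0 < (best.length : Int) := by rw [hlb]; omega
    simp only [List.foldl_cons]
    have hred : pvEdgeStep t (best, indeg, app) c0 =
        ((if t > PySem.List.pyGetD best c0 0 then PySem.List.pySetD best c0 t else best),
         PySem.List.pySetD indeg c0 (PySem.List.pyGetD indeg c0 0 - 1),
         (if PySem.List.pyGetD (PySem.List.pySetD indeg c0
              (PySem.List.pyGetD indeg c0 0 - 1)) c0 0 == 0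
          then app ++ [c0] else app)) := rfl
    rw [hred]
    set best1 := (if t > PySem.List.pyGetD best c0 0 then PySem.List.pySetD best c0 t else best)
      with hbest1
    set indeg1 := PySem.List.pySetD indeg c0 (PySem.List.pyGetD indeg c0 0 - 1) with hindeg1
    set app1 := (if PySem.List.pyGetD indeg1 c0 0 == 0 then app ++ [c0] else app) with happ1
    have hgeti1 : ∀ x : Int, 0 ≤ x →
        PySem.List.pyGetD indeg1 x 0 =
          if x = c0 then PySem.List.pyGetD indeg c0 0 - 1 else PySem.List.pyGetD indeg x 0 :=
      fun x hx => pvGetSet indeg c0 x _ 0 hc0.1 hc0len hx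
    have hgetb1 : ∀ x : Int, 0 ≤ x →
        PySem.List.pyGetD best1 x 0 =
          if x = c0 then max (PySem.List.pyGetD best c0 0) t else PySem.List.pyGetD best x 0 := by
      intro x hx
      rw [hbest1]
      by_cases hb : t > PySem.List.pyGetD best c0 0
      · rw [if_pos hb, pvGetSet best c0 x t 0 hc0.1 hc0lenb hx]
        by_cases hxc : x = c0
        · rw [if_pos hxc, if_pos hxc]
          omega
        · rw [if_neg hxc, if_neg hxc]
      · rw [if_neg hb]
        by_cases hxc : x = c0
        · rw [if_pos hxc, hxc]
          omega
        · rw [if_neg hxc]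
    have hlb1 : best1.length = (N + 1).toNat := by
      rw [hbest1]
      by_cases hb : t > PySem.List.pyGetD best c0 0
      · rw [if_pos hb, PySem.List.length_pySetD]; exact hlb
      · rw [if_neg hb]; exact hlb
    have hli1 : indeg1.length = (N + 1).toNat := by
      rw [hindeg1, PySem.List.length_pySetD]; exact hli
    have hcnt1 : ∀ c : Int, 0 ≤ c → c < N + 1 →
        ((rest.count c : Int) ≤ PySem.List.pyGetD indeg1 c 0) := by
      intro c h0 h1
      have hc := hcnt c h0 h1
      rw [hgeti1 c h0]
      by_cases hxc : c = c0
      · subst hxc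
        rw [if_pos rfl]
        rw [List.count_cons_self] at hc
        push_cast at hc ⊢
        omega
      · rw [if_neg hxc]
        rw [List.count_cons_of_ne (Ne.symm hxc)] at hc
        exact hc
    obtain ⟨g1, g2, g3, g4, A', hA'eq, hA'nd, hA'iff⟩ :=
      ih best1 indeg1 app1 hlb1 hli1 (fun c hc => hbnd c (List.mem_cons_of_mem _ hc)) hcnt1
    refine ⟨g1, g2, ?_, ?_, ?_⟩
    · intro c h0 h1
      rw [g3 c h0 h1, hgeti1 c h0]
      by_cases hxc : c = c0
      · subst hxc
        rw [if_pos rfl, List.count_cons_self]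
        push_cast
        omega
      · rw [if_neg hxc, List.count_cons_of_ne (Ne.symm hxc)]
    · intro c h0 h1
      rw [g4 c h0 h1, hgetb1 c h0]
      by_cases hxc : c = c0
      · subst hxc
        rw [if_pos rfl, List.count_cons_self]
        have hmm : max (max (PySem.List.pyGetD best c 0) t) t
            = max (PySem.List.pyGetD best c 0) t := by
          rw [max_assoc, max_self]
        by_cases hr : 0 < rest.count c
        · rw [if_pos hr, if_pos (by omega), hmm]
        · rw [if_neg hr, if_pos (by omega)]
      · rw [if_neg hxc, List.count_cons_of_ne (Ne.symm hxc)]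
    · -- the appended queue entries
      have happ1' : app1 = app ++ (if PySem.List.pyGetD indeg c0 0 = 1 then [c0] else []) := by
        rw [happ1, hgeti1 c0 hc0.1, if_pos rfl]
        by_cases h1 : PySem.List.pyGetD indeg c0 0 = 1
        · rw [if_pos h1, h1]
          simp
        · have hz : ¬ (PySem.List.pyGetD indeg c0 0 - 1 = 0) := by omega
          rw [if_neg h1]
          simp [hz]
      refine ⟨(if PySem.List.pyGetD indeg c0 0 = 1 then [c0] else []) ++ A',
        by rw [hA'eq, happ1', List.append_assoc], ?_, ?_⟩
      · by_cases h1 : PySem.List.pyGetD indeg c0 0 = 1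
        · rw [if_pos h1]
          rw [List.singleton_append, List.nodup_cons]
          refine ⟨?_, hA'nd⟩
          intro hc0A
          have := (hA'iff c0).mp hc0A
          rw [hgeti1 c0 hc0.1, if_pos rfl, h1] at this
          omega
        · rw [if_neg h1, List.nil_append]
          exact hA'nd
      · intro x
        rw [List.mem_append]
        by_cases hxc : x = c0
        · subst hxc
          rw [List.count_cons_self]
          have hA'x := hA'iff x
          rw [hgeti1 x hc0.1, if_pos rfl] at hA'x
          have hcx := hcnt x hc0.1 hc0.2
          rw [List.count_cons_self] at hcx
          constructor
          · rintro (hh | hh)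
            · by_cases h1 : PySem.List.pyGetD indeg x 0 = 1
              · rw [if_pos h1] at hh
                simp only [List.mem_singleton] at hh
                push_cast at hcx ⊢
                constructor
                · omega
                · -- indeg = 1 forces rest.count x = 0
                  omega
              · rw [if_neg h1] at hh
                cases hh
            · have := hA'x.mp hh
              push_cast at this ⊢
              constructor
              · omega
              · omega
          · rintro ⟨hpos, heq⟩
            by_cases hr : 0 < rest.count x
            · right
              apply hA'x.mpr
              push_cast at heq ⊢
              exact ⟨hr, by omega⟩
            · left
              have h1 : PySem.List.pyGetD indeg x 0 = 1 := by
                push_cast at heq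
                omega
              rw [if_pos h1]
              exact List.mem_singleton.mpr rfl
        · rw [List.count_cons_of_ne (Ne.symm hxc)]
          have hA'x := hA'iff x
          constructor
          · rintro (hh | hh)
            · exfalso
              by_cases h1 : PySem.List.pyGetD indeg c0 0 = 1
              · rw [if_pos h1] at hh
                exact hxc (List.mem_singleton.mp hh)
              · rw [if_neg h1] at hh
                cases hh
            · have := hA'x.mp hh
              by_cases hx0 : 0 ≤ x
              · rwa [hgeti1 x hx0, if_neg hxc] at this
              · exfalso
                have : 0 < rest.count x := this.1
                have hmx : x ∈ rest := List.count_pos_iff.mp this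
                exact hx0 (hbnd x (List.mem_cons_of_mem _ hmx)).1
          · rintro ⟨hpos, heq⟩
            right
            apply hA'x.mpr
            have hx0 : 0 ≤ x := by
              have hmx : x ∈ rest := List.count_pos_iff.mp hpos
              exact (hbnd x (List.mem_cons_of_mem _ hmx)).1
            rw [hgeti1 x hx0, if_neg hxc]
            exact ⟨hpos, heq⟩

theorem pvKStep (N : Int) (D : List Int) (graph : List (List Int)) (parent : List Int)
    (w : PvWF N D graph parent) (indeg best ret : List Int) (S : List Int) (v : Int)
    (Qrest : List Int)
    (hK : PvK N D graph parent indeg best ret S (v :: Qrest)) :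
    PvK N D graph parent
      ((PySem.List.pyGetD graph v []).foldl
          (pvEdgeStep (PySem.List.pyGetD best v 0 + PySem.List.pyGetD D (v - 1) 0))
          (best, indeg, [])).2.1
      ((PySem.List.pyGetD graph v []).foldl
          (pvEdgeStep (PySem.List.pyGetD best v 0 + PySem.List.pyGetD D (v - 1) 0))
          (best, indeg, [])).1
      (PySem.List.pySetD ret v (PySem.List.pyGetD best v 0 + PySem.List.pyGetD D (v - 1) 0))
      (S ++ [v])
      (Qrest ++ ((PySem.List.pyGetD graph v []).foldl
          (pvEdgeStep (PySem.List.pyGetD best v 0 + PySem.List.pyGetD D (v - 1) 0))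
          (best, indeg, [])).2.2) := by
  obtain ⟨nod, bnd, leni, lenb, lenr, ideg, memiff, bspec, ok, rval, rzero, rpos⟩ := hK
  set t := PySem.List.pyGetD best v 0 + PySem.List.pyGetD D (v - 1) 0 with htdef
  set l := PySem.List.pyGetD graph v [] with hldef
  have hvmem : v ∈ S ++ v :: Qrest := List.mem_append_right _ List.mem_cons_self
  have hvb := bnd v hvmem
  obtain ⟨hSnd, hQnd, hdisj⟩ := List.nodup_append.mp nod
  have hvS : v ∉ S := fun h => hdisj v h v List.mem_cons_self rfl
  have hSvSub : (S ++ [v]).Sublist (S ++ v :: Qrest) :=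
    ((List.nil_sublist Qrest).cons₂ v).append_left S
  have hSv_nd : (S ++ [v]).Nodup := nod.sublist hSvSub
  have hSb : ∀ u ∈ S, 0 ≤ u ∧ u < N + 1 :=
    fun u hu => bnd u (List.mem_append_left _ hu)
  have hSbv : ∀ u ∈ S ++ [v], 0 ≤ u ∧ u < N + 1 := by
    intro u hu
    rcases List.mem_append.mp hu with h | h
    · exact hSb u h
    · simp only [List.mem_singleton] at h; subst h; exact hvb
  have hvfull : pvSumS graph S v = pvDegN N graph v := (memiff v hvb.1 hvb.2).mp hvmem
  have hcnt_le : ∀ c : Int, pvSumS graph S c + pvCnt graph v c ≤ pvDegN N graph c := by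
    intro c
    have := pvSumS_le N D graph parent (S ++ [v]) c hSv_nd hSbv
    rwa [pvSumS_append] at this
  have hcnt_vv : pvCnt graph v v = 0 := by
    have := hcnt_le v
    omega
  have hsupp := pvSum_support S (pvRangeN N) (fun u => pvCnt graph u v) hSnd
    (pvNodup_rangeN N) (fun x hx => (pvMem_rangeN N x).mpr (hSb x hx)) hvfull
  have hpredsS : ∀ u ∈ pvP graph N v, u ∈ S := by
    intro u hu
    have hub := (pvP_mem N D graph parent w v hvb.1 hvb.2 u).mp hu
    exact hsupp u ((pvMem_rangeN N u).mpr ⟨hub.1, hub.2.1⟩) hub.2.2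
  have hclosedSQ : ∀ x ∈ S ++ v :: Qrest, ∀ u ∈ pvP graph N x, u ∈ S := by
    intro x hx u hu
    have hxb := bnd x hx
    have hxfull := (memiff x hxb.1 hxb.2).mp hx
    have hub := (pvP_mem N D graph parent w x hxb.1 hxb.2 u).mp hu
    exact pvSum_support S (pvRangeN N) (fun u => pvCnt graph u x) hSnd
      (pvNodup_rangeN N) (fun y hy => (pvMem_rangeN N y).mpr (hSb y hy)) hxfull
      u ((pvMem_rangeN N u).mpr ⟨hub.1, hub.2.1⟩) hub.2.2
  have hGAmem : l ∈ graph := by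
    rw [hldef]
    apply pvGetMem graph v [] hvb.1
    rw [w.hG]
    exact hvb.2
  have hlbnd : ∀ c ∈ l, 0 ≤ c ∧ c < N + 1 := by
    intro c hc
    have := w.hC l hGAmem c hc
    omega
  have hlcount : ∀ c : Int, l.count c = pvCnt graph v c := fun _ => rfl
  have hcountle : ∀ c : Int, 0 ≤ c → c < N + 1 →
      ((l.count c : Int) ≤ PySem.List.pyGetD indeg c 0) := by
    intro c h0 h1
    rw [ideg c h0 h1, pvParentDeg N D graph parent w c h0 h1, hlcount c]
    have := hcnt_le c
    push_cast
    omega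
  obtain ⟨e1, e2, e3, e4, A, hAeq, hAnd, hAiff⟩ :=
    pvEdges N t l best indeg [] lenb leni hlbnd hcountle
  rw [List.nil_append] at hAeq
  have hAchar : ∀ x : Int, x ∈ A ↔
      (0 < pvCnt graph v x ∧ pvSumS graph S x + pvCnt graph v x = pvDegN N graph x) := by
    intro x
    rw [hAiff x]
    constructor
    · rintro ⟨hp, he⟩
      have hb := hlbnd x (List.count_pos_iff.mp hp)
      rw [ideg x hb.1 hb.2, pvParentDeg N D graph parent w x hb.1 hb.2, hlcount x] at he
      rw [hlcount x] at hp
      refine ⟨hp, ?_⟩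
      push_cast at he
      omega
    · rintro ⟨hp, he⟩
      rw [← hlcount x] at hp
      have hb := hlbnd x (List.count_pos_iff.mp hp)
      refine ⟨hp, ?_⟩
      rw [ideg x hb.1 hb.2, pvParentDeg N D graph parent w x hb.1 hb.2, hlcount x]
      push_cast
      omega
  have hAb : ∀ x ∈ A, 0 ≤ x ∧ x < N + 1 :=
    fun x hx => hlbnd x (List.count_pos_iff.mp ((hAiff x).mp hx).1)
  have hAdisj : ∀ x ∈ S ++ v :: Qrest, x ∉ A := by
    intro x hx hxA
    have h1 := (hAchar x).mp hxA
    have hxb := bnd x hx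
    have h2 := (memiff x hxb.1 hxb.2).mp hx
    have h3 := hcnt_le x
    omega
  have hretlen : v < (ret.length : Int) := by rw [lenr]; omega
  have hget_ret1 : ∀ x : Int, 0 ≤ x →
      PySem.List.pyGetD (PySem.List.pySetD ret v t) x 0 =
        if x = v then t else PySem.List.pyGetD ret x 0 :=
    fun x hx => pvGetSet ret v x t 0 hvb.1 hretlen hx
  have hfilter_all : (pvP graph N v).filter (fun u => decide (u ∈ S)) = pvP graph N v :=
    List.filter_eq_self.mpr (fun u hu => by simpa using hpredsS u hu)
  have hmap_agree : (pvP graph N v).map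
        (fun u => PySem.List.pyGetD (PySem.List.pySetD ret v t) u 0)
      = (pvP graph N v).map (fun u => PySem.List.pyGetD ret u 0) := by
    apply List.map_congr_left
    intro u hu
    have huS := hpredsS u hu
    have hune : ¬ u = v := fun h => hvS (h ▸ huS)
    rw [hget_ret1 u (hSb u huS).1, if_neg hune]
  have hretnn : ∀ y ∈ (pvP graph N v).map (fun u => PySem.List.pyGetD ret u 0), 0 ≤ y := by
    intro y hy
    obtain ⟨u, hu, rfl⟩ := List.mem_map.mp hy
    exact rpos u (hpredsS u hu)
  have ht_eq : t = pvMaxD ((pvP graph N v).map (fun u => PySem.List.pyGetD ret u 0)) + pvD D v := by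
    rw [htdef, bspec v hvb.1 hvb.2, hfilter_all,
      pvMax0_eq_pvMaxD _ hretnn]
    rfl
  have htpos : 0 ≤ t := by
    rw [htdef, bspec v hvb.1 hvb.2]
    have h1 := pvMax0_nonneg (((pvP graph N v).filter (fun u => decide (u ∈ S))).map
      (fun u => PySem.List.pyGetD ret u 0))
    have h2 := pvD_nonneg N D graph parent w v hvb.1 hvb.2
    rw [pvD] at h2
    omega
  refine ⟨?_, ?_, e2, e1, by rw [PySem.List.length_pySetD]; exact lenr, ?_, ?_, ?_, ?_, ?_, ?_, ?_⟩
  · -- nodup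
    rw [hAeq, ← List.append_assoc]
    apply List.nodup_append.mpr
    refine ⟨?_, hAnd, ?_⟩
    · rw [List.append_assoc, List.singleton_append]
      exact nod
    · intro a ha b hb heq
      rw [List.append_assoc, List.singleton_append] at ha
      exact hAdisj a ha (heq ▸ hb)
  · -- bounds
    intro x hx
    rw [hAeq] at hx
    rcases List.mem_append.mp hx with h | h
    · exact hSbv x h
    · rcases List.mem_append.mp h with h | h
      · exact bnd x (List.mem_append_right _ (List.mem_cons_of_mem _ h))
      · exact hAb x h
  · -- indeg spec
    intro c h0 h1
    rw [e3 c h0 h1, ideg c h0 h1, pvSumS_append, hlcount c]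
    push_cast
    ring
  · -- membership iff
    intro c h0 h1
    rw [pvSumS_append]
    constructor
    · intro hc
      rw [hAeq] at hc
      rcases List.mem_append.mp hc with h | h
      · -- c ∈ S ++ [v]
        have hcold : c ∈ S ++ v :: Qrest := hSvSub.mem h
        have := (memiff c h0 h1).mp hcold
        have := hcnt_le c
        omega
      · rcases List.mem_append.mp h with h | h
        · have hcold : c ∈ S ++ v :: Qrest :=
            List.mem_append_right _ (List.mem_cons_of_mem _ h)
          have := (memiff c h0 h1).mp hcold
          have := hcnt_le c
          omega
        · have := (hAchar c).mp h
          omega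
    · intro hc
      by_cases hcz : pvCnt graph v c = 0
      · have hold : c ∈ S ++ v :: Qrest := (memiff c h0 h1).mpr (by omega)
        rw [hAeq]
        rcases List.mem_append.mp hold with h | h
        · exact List.mem_append_left _ (List.mem_append_left _ h)
        · rcases List.mem_cons.mp h with h | h
          · subst h
            exact List.mem_append_left _ (List.mem_append_right _ List.mem_cons_self)
          · exact List.mem_append_right _ (List.mem_append_left _ h)
      · have hcA : c ∈ A := (hAchar c).mpr ⟨by omega, by omega⟩
        rw [hAeq]
        exact List.mem_append_right _ (List.mem_append_right _ hcA)
  · -- best spec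
    intro c h0 h1
    rw [e4 c h0 h1]
    by_cases hc : 0 < l.count c
    · rw [if_pos hc, bspec c h0 h1]
      have hvP : v ∈ pvP graph N c := by
        rw [pvP_mem N D graph parent w c h0 h1 v]
        exact ⟨hvb.1, hvb.2, by rw [← hlcount c]; omega⟩
      apply le_antisymm
      · apply max_le
        · apply pvMax0_le _ _ (pvMax0_nonneg _)
          intro y hy
          obtain ⟨u, hu, rfl⟩ := List.mem_map.mp hy
          have hu2 := List.mem_filter.mp hu
          have huS : u ∈ S := by simpa using hu2.2
          have hune : ¬ u = v := fun h => hvS (h ▸ huS)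
          apply le_pvMax0
          apply List.mem_map.mpr
          refine ⟨u, ?_, ?_⟩
          · exact List.mem_filter.mpr ⟨hu2.1, by simp [List.mem_append, huS]⟩
          · rw [hget_ret1 u (hSb u huS).1, if_neg hune]
        · apply le_pvMax0
          apply List.mem_map.mpr
          refine ⟨v, ?_, ?_⟩
          · exact List.mem_filter.mpr ⟨hvP, by simp⟩
          · rw [hget_ret1 v hvb.1, if_pos rfl]
      · apply pvMax0_le
        · exact le_trans (pvMax0_nonneg _) (le_max_left _ _)
        · intro y hy
          obtain ⟨u, hu, rfl⟩ := List.mem_map.mp hy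
          have hu2 := List.mem_filter.mp hu
          have huSv : u ∈ S ++ [v] := by simpa using hu2.2
          rcases List.mem_append.mp huSv with h | h
          · have hune : ¬ u = v := fun hh => hvS (hh ▸ h)
            rw [hget_ret1 u (hSb u h).1, if_neg hune]
            refine le_trans ?_ (le_max_left _ _)
            apply le_pvMax0
            apply List.mem_map.mpr
            exact ⟨u, List.mem_filter.mpr ⟨hu2.1, by simpa using h⟩, rfl⟩
          · simp only [List.mem_singleton] at h
            subst h
            rw [hget_ret1 u hvb.1, if_pos rfl]
            exact le_max_right _ _
    · rw [if_neg hc, bspec c h0 h1]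
      have hvnotP : v ∉ pvP graph N c := by
        rw [pvP_mem N D graph parent w c h0 h1 v]
        rintro ⟨_, _, hcc⟩
        exact hcc (by rw [← hlcount c]; omega)
      have hfc : (pvP graph N c).filter (fun u => decide (u ∈ S ++ [v]))
          = (pvP graph N c).filter (fun u => decide (u ∈ S)) := by
        apply List.filter_congr
        intro u hu
        have hune : ¬ u = v := fun h => hvnotP (h ▸ hu)
        simp [List.mem_append, hune]
      rw [hfc]
      apply congrArg
      apply List.map_congr_left
      intro u hu
      have hu2 := List.mem_filter.mp hu
      have huS : u ∈ S := by simpa using hu2.2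
      have hune : ¬ u = v := fun h => hvS (h ▸ huS)
      rw [hget_ret1 u (hSb u huS).1, if_neg hune]
  · -- pvOk
    apply pvOk_append N graph parent v S [] ok
    by_cases hdeg : pvDegN N graph v = 0
    · left
      rw [pvParentDeg N D graph parent w v hvb.1 hvb.2, hdeg]
      rfl
    · right
      refine ⟨fun h => hdeg ((pvP_nil_iff N D graph parent w v hvb.1 hvb.2).mp h),
        fun u hu => by simpa using hpredsS u hu⟩
  · -- ret values
    intro x hx
    rcases List.mem_append.mp hx with h | h
    · have hxb := hSb x h
      have hxne : ¬ x = v := fun hh => hvS (hh ▸ h)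
      rw [hget_ret1 x hxb.1, if_neg hxne]
      rw [rval x h]
      congr 2
      apply List.map_congr_left
      intro u hu
      have huS : u ∈ S := hclosedSQ x (List.mem_append_left _ h) u hu
      have hune : ¬ u = v := fun hh => hvS (hh ▸ huS)
      rw [hget_ret1 u (hSb u huS).1, if_neg hune]
    · simp only [List.mem_singleton] at h
      subst h
      rw [hget_ret1 x hvb.1, if_pos rfl, hmap_agree]
      exact ht_eq
  · -- zeros
    intro x h0 h1 hxS
    have hxne : ¬ x = v := fun hh => hxS (hh ▸ List.mem_append_right _ List.mem_cons_self)
    rw [hget_ret1 x h0, if_neg hxne]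
    exact rzero x h0 h1 (fun h => hxS (List.mem_append_left _ h))
  · -- nonneg
    intro x hx
    rcases List.mem_append.mp hx with h | h
    · have hxne : ¬ x = v := fun hh => hvS (hh ▸ h)
      rw [hget_ret1 x (hSb x h).1, if_neg hxne]
      exact rpos x h
    · simp only [List.mem_singleton] at h
      subst h
      rw [hget_ret1 x hvb.1, if_pos rfl]
      exact htpos

theorem pvKRun (N : Int) (D : List Int) (graph : List (List Int)) (parent : List Int)
    (w : PvWF N D graph parent) :
    ∀ (fuel : Nat) (S Q indeg best ret : List Int),
      PvK N D graph parent indeg best ret S Q →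
      (N + 1).toNat < S.length + fuel →
      ∃ L i b, PvK N D graph parent i b (pvLoopB D graph fuel indeg best ret Q) L [] := by
  intro fuel
  induction fuel with
  | zero =>
    intro S Q indeg best ret hK hlt
    exfalso
    have hnd : S.Nodup := (List.nodup_append.mp hK.nod).1
    have := pvNodupLen N S hnd (fun v hv => hK.bnd v (List.mem_append_left _ hv))
    omega
  | succ fuel ih =>
    intro S Q indeg best ret hK hlt
    cases Q with
    | nil =>
      refine ⟨S, indeg, best, ?_⟩
      have hred : pvLoopB D graph (fuel + 1) indeg best ret [] = ret := rfl
      rw [hred]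
      exact hK
    | cons v rest =>
      have hstep := pvKStep N D graph parent w indeg best ret S v rest hK
      have hred : pvLoopB D graph (fuel + 1) indeg best ret (v :: rest) =
          pvLoopB D graph fuel
            ((PySem.List.pyGetD graph v []).foldl
                (pvEdgeStep (PySem.List.pyGetD best v 0 + PySem.List.pyGetD D (v - 1) 0))
                (best, indeg, [])).2.1
            ((PySem.List.pyGetD graph v []).foldl
                (pvEdgeStep (PySem.List.pyGetD best v 0 + PySem.List.pyGetD D (v - 1) 0))
                (best, indeg, [])).1
            (PySem.List.pySetD ret v
              (PySem.List.pyGetD best v 0 + PySem.List.pyGetD D (v - 1) 0))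
            (rest ++ ((PySem.List.pyGetD graph v []).foldl
                (pvEdgeStep (PySem.List.pyGetD best v 0 + PySem.List.pyGetD D (v - 1) 0))
                (best, indeg, [])).2.2) := rfl
      obtain ⟨L, i, b, h⟩ := ih (S ++ [v]) _ _ _ _ hstep
        (by rw [List.length_append]; simp; omega)
      exact ⟨L, i, b, by rw [hred]; exact h⟩

theorem pvKInit (N : Int) (D : List Int) (graph : List (List Int)) (parent : List Int)
    (w : PvWF N D graph parent) :
    PvK N D graph parent parent (List.replicate (N + 1).toNat 0)
      (List.replicate (N + 1).toNat 0) []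
      ((pvRangeN N).filter (fun j => PySem.List.pyGetD parent j 0 == 0)) := by
  have hmemf : ∀ x : Int,
      x ∈ (pvRangeN N).filter (fun j => PySem.List.pyGetD parent j 0 == 0) ↔
        (0 ≤ x ∧ x < N + 1 ∧ PySem.List.pyGetD parent x 0 = 0) := by
    intro x
    rw [List.mem_filter, pvMem_rangeN]
    simp [and_assoc]
  have hrep : ∀ x : Int, 0 ≤ x → x < N + 1 →
      PySem.List.pyGetD (List.replicate (N + 1).toNat (0 : Int)) x 0 = 0 := by
    intro x h0 h1
    rw [PySem.List.pyGetD_eq_getElem _ 0 h0 (by simp; omega)]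
    simp
  refine ⟨?_, ?_, ?_, by simp, by simp, ?_, ?_, ?_, trivial, ?_, ?_, ?_⟩
  · rw [List.nil_append]
    exact (pvNodup_rangeN N).filter _
  · intro x hx
    rw [List.nil_append] at hx
    have := (hmemf x).mp hx
    exact ⟨this.1, this.2.1⟩
  · have := w.hP
    omega
  · intro x h0 h1
    rw [pvSumS_nil]
    simp
  · intro x h0 h1
    rw [List.nil_append, hmemf x, pvSumS_nil,
      show PySem.List.pyGetD parent x 0 = (pvDegN N graph x : Int) from
        pvParentDeg N D graph parent w x h0 h1]
    constructor
    · rintro ⟨_, _, h⟩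
      omega
    · intro h
      exact ⟨h0, h1, by omega⟩
  · intro x h0 h1
    rw [hrep x h0 h1]
    have : (pvP graph N x).filter (fun u => decide (u ∈ ([] : List Int))) = [] := by
      simp
    rw [this]
    rfl
  · intro x hx
    cases hx
  · intro x h0 h1 _
    exact hrep x h0 h1
  · intro x hx
    cases hx

-- ---------- A-side analysis (the heap simulation realises the same values) ----------

def pvPushes (graph : List (List Int)) (parent : List Int) (S : List Int) (v : Int) : Int :=
  (if PySem.List.pyGetD parent v 0 = 0 then 1 else 0) + (pvSumS graph S v : Int)

def pvHCnt (heap : List (Int × Int)) (v : Int) : Nat :=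
  heap.countP (fun e => e.2 == v)

def pvTarget (parent : List Int) (v : Int) : Int :=
  if PySem.List.pyGetD parent v 0 = 0 then 1 else PySem.List.pyGetD parent v 0

def pvMeasure (N : Int) (graph : List (List Int)) (S : List Int) (heap : List (Int × Int)) : Nat :=
  heap.length + (((pvRangeN N).filter (fun w => !(S.contains w))).map (fun w => (pvGA graph w).length)).sum

def pvAInv (N : Int) (D : List Int) (graph : List (List Int)) (parent : List Int)
    (retB L : List Int) (S : List Int) (t0 : Int)
    (ret par : List Int) (heap : List (Int × Int)) : Prop :=
  S.Nodup ∧ (∀ v ∈ S, 0 ≤ v ∧ v < N + 1 ∧ v ∈ L) ∧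
  ret.length = (N + 1).toNat ∧ par.length = (N + 1).toNat ∧
  (∀ v ∈ S, PySem.List.pyGetD ret v 0 = PySem.List.pyGetD retB v 0) ∧
  (∀ v : Int, 0 ≤ v → v < N + 1 → v ∉ S → PySem.List.pyGetD ret v 0 = 0) ∧
  (∀ v : Int, 0 ≤ v → v < N + 1 →
    PySem.List.pyGetD par v 0 =
      PySem.List.pyGetD parent v 0 - pvPushes graph parent S v + (pvHCnt heap v : Int)) ∧
  (∀ v : Int, 0 ≤ v → v < N + 1 → 0 ≤ pvPushes graph parent S v - (pvHCnt heap v : Int)) ∧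
  (∀ v : Int, 0 ≤ v → v < N + 1 →
    (v ∈ S ↔ pvPushes graph parent S v - (pvHCnt heap v : Int) = pvTarget parent v)) ∧
  (∀ e ∈ heap, 0 ≤ e.2 ∧ e.2 < N + 1 ∧ t0 ≤ e.1) ∧
  (∀ e ∈ heap, (PySem.List.pyGetD parent e.2 0 = 0 ∧ e.1 = pvD D e.2) ∨
    (∃ u ∈ S, e.2 ∈ pvGA graph u ∧ e.1 = PySem.List.pyGetD retB u 0 + pvD D e.2)) ∧
  (∀ v : Int, 0 ≤ v → v < N + 1 → ∀ u ∈ S, v ∈ pvGA graph u →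
    (PySem.List.pyGetD retB u 0 + pvD D v ≤ t0 ∨
      (PySem.List.pyGetD retB u 0 + pvD D v, v) ∈ heap))

theorem pvHeapMin_mem (xs : List (Int × Int)) :
    ∀ m, pvHeapMin m xs = m ∨ pvHeapMin m xs ∈ xs := by
  induction xs with
  | nil => intro m; left; rfl
  | cons x xs ih =>
    intro m
    simp only [pvHeapMin]
    rcases ih (if pvPairLt x m then x else m) with hc | hc
    · by_cases h : pvPairLt x m = true
      · rw [if_pos h] at hc ⊢
        right; rw [hc]; exact List.mem_cons_self
      · rw [if_neg h] at hc ⊢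
        left; exact hc
    · right; exact List.mem_cons_of_mem _ hc

theorem pvHeapMin_fst_le (xs : List (Int × Int)) :
    ∀ m e, (e = m ∨ e ∈ xs) → (pvHeapMin m xs).1 ≤ e.1 := by
  induction xs with
  | nil =>
    intro m e he
    rcases he with he | he
    · subst he; exact le_refl _
    · cases he
  | cons x xs ih =>
    intro m e he
    have hstep : (if pvPairLt x m then x else m).1 ≤ m.1 ∧
        (if pvPairLt x m then x else m).1 ≤ x.1 := by
      unfold pvPairLt
      split_ifs with h
      · simp at h; constructor
        · rcases h with h | ⟨h, _⟩ <;> omega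
        · exact le_refl _
      · simp at h; constructor
        · exact le_refl _
        · omega
    have hrec := ih (if pvPairLt x m then x else m)
    simp only [pvHeapMin]
    rcases he with he | he
    · subst he
      exact le_trans (hrec _ (Or.inl rfl)) hstep.1
    · rcases List.mem_cons.mp he with he | he
      · subst he
        exact le_trans (hrec _ (Or.inl rfl)) hstep.2
      · exact hrec e (Or.inr he)

theorem pvPushes_le (N : Int) (D : List Int) (graph : List (List Int)) (parent : List Int)
    (w : PvWF N D graph parent) (S : List Int) (v : Int)
    (hS : S.Nodup) (hSb : ∀ u ∈ S, 0 ≤ u ∧ u < N + 1)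
    (h0 : 0 ≤ v) (h1 : v < N + 1) :
    pvPushes graph parent S v ≤ pvTarget parent v := by
  have hpd := pvParentDeg N D graph parent w v h0 h1
  rw [pvPushes, pvTarget]
  by_cases hz : PySem.List.pyGetD parent v 0 = 0
  · rw [if_pos hz, if_pos hz]
    have hdeg : pvDegN N graph v = 0 := by omega
    have := pvSumS_zero N D graph parent w S v hSb hdeg
    omega
  · rw [if_neg hz, if_neg hz]
    have := pvSumS_le N D graph parent S v hS hSb
    omega

theorem pvPushes_start (N : Int) (D : List Int) (graph : List (List Int)) (parent : List Int)
    (w : PvWF N D graph parent) (S : List Int) (v : Int)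
    (hSb : ∀ u ∈ S, 0 ≤ u ∧ u < N + 1)
    (h0 : 0 ≤ v) (h1 : v < N + 1) (hz : PySem.List.pyGetD parent v 0 = 0) :
    pvPushes graph parent S v = 1 := by
  have hpd := pvParentDeg N D graph parent w v h0 h1
  have hdeg : pvDegN N graph v = 0 := by omega
  have := pvSumS_zero N D graph parent w S v hSb hdeg
  rw [pvPushes, if_pos hz]
  omega

theorem pvPushes_append (graph : List (List Int)) (parent : List Int)
    (S : List Int) (v x : Int) :
    pvPushes graph parent (S ++ [x]) v = pvPushes graph parent S v + (pvCnt graph x v : Int) := by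
  rw [pvPushes, pvPushes, pvSumS, pvSumS, List.map_append, List.sum_append]
  push_cast
  simp
  omega

theorem pvHCnt_erase :
    ∀ (heap : List (Int × Int)) (m : Int × Int), m ∈ heap → ∀ v : Int,
      pvHCnt heap v = pvHCnt (heap.erase m) v + (if m.2 = v then 1 else 0) := by
  intro heap
  induction heap with
  | nil => intro m hm; cases hm
  | cons x xs ih =>
    intro m hm v
    by_cases hxm : x = m
    · subst hxm
      rw [List.erase_cons_head]
      rw [pvHCnt, List.countP_cons]
      rw [pvHCnt]
      by_cases h : x.2 = v
      · rw [if_pos h, if_pos (by simpa using h)]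
      · rw [if_neg h, if_neg (by simpa using h)]
    · have hxm2 : ¬ (x == m) = true := by simpa using hxm
      rw [List.erase_cons_tail (by simpa using hxm2)]
      have hm2 : m ∈ xs := by
        rcases List.mem_cons.mp hm with h | h
        · exact absurd h.symm hxm
        · exact h
      rw [pvHCnt, List.countP_cons, pvHCnt, List.countP_cons]
      have := ih m hm2 v
      rw [pvHCnt, pvHCnt] at this
      omega

theorem pvHCnt_append_map (heap : List (Int × Int)) (l : List Int) (t : Int) (D : List Int) (v : Int) :
    pvHCnt (heap ++ l.map (fun c => (t + pvD D c, c))) v = pvHCnt heap v + l.count v := by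
  rw [pvHCnt, pvHCnt, List.countP_append, List.countP_map]
  congr 1

theorem pvHCnt_pos (heap : List (Int × Int)) (m : Int × Int) (hm : m ∈ heap) :
    1 ≤ pvHCnt heap m.2 := by
  rw [pvHCnt]
  have : 0 < heap.countP (fun e => e.2 == m.2) :=
    List.countP_pos_iff.mpr ⟨m, hm, by simp⟩
  omega

theorem pvFilterSum (f : Int → Nat) (v : Int) :
    ∀ (l : List Int), l.Nodup → v ∈ l → ∀ (S : List Int), v ∉ S →
      ((l.filter (fun w => !(S.contains w))).map f).sum
        = ((l.filter (fun w => !((S ++ [v]).contains w))).map f).sum + f v := by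
  intro l
  induction l with
  | nil => intro _ hv; cases hv
  | cons a l ih =>
    intro hnd hv S hvS
    have hnd2 := List.nodup_cons.mp hnd
    by_cases hav : a = v
    · subst hav
      have hfilt : l.filter (fun w => !(S.contains w)) =
          l.filter (fun w => !((S ++ [a]).contains w)) := by
        apply List.filter_congr
        intro x hx
        have hxa : ¬ x = a := fun h => hnd2.1 (h ▸ hx)
        simp [List.contains_append, hxa]
      simp only [List.filter_cons]
      have h1 : (!(S.contains a)) = true := by
        simp [List.contains_iff_mem]
        exact fun h => hvS h
      have h2 : (!((S ++ [a]).contains a)) = false := by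
        simp [List.contains_append]
      rw [h1, h2]
      simp only [if_true, Bool.false_eq_true, if_false, List.map_cons, List.sum_cons, hfilt]
      omega
    · have hvl : v ∈ l := by
        rcases List.mem_cons.mp hv with h | h
        · exact absurd h.symm hav
        · exact h
      simp only [List.filter_cons]
      have hco : ((S ++ [v]).contains a) = (S.contains a) := by
        simp [List.contains_append, hav]
      rw [hco]
      by_cases hc : (!(S.contains a)) = true
      · rw [hc]
        simp only [if_true, List.map_cons, List.sum_cons]
        rw [ih hnd2.2 hvl S hvS]
        omega
      · rw [Bool.not_eq_true] at hc
        rw [hc]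
        simp only [Bool.false_eq_true, if_false]
        exact ih hnd2.2 hvl S hvS

theorem pvGetNat (xs : List Int) (k : Nat) (hk : k < xs.length) :
    PySem.List.pyGetD xs (k : Int) 0 = xs[k] := by
  rw [PySem.List.pyGetD_eq_getElem xs 0 (by omega) (by simpa using hk)]
  simp

theorem pvOk_sub (N : Int) (D : List Int) (graph : List (List Int)) (parent : List Int)
    (w : PvWF N D graph parent) (S : List Int)
    (hS : S.Nodup) (hSb : ∀ u ∈ S, 0 ≤ u ∧ u < N + 1)
    (hiff : ∀ v : Int, 0 ≤ v → v < N + 1 →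
      (v ∈ S ↔ pvPushes graph parent S v = pvTarget parent v)) :
    ∀ (t acc : List Int), pvOk N graph parent acc t → (∀ x ∈ acc, x ∈ S) →
      (∀ x ∈ t, 0 ≤ x ∧ x < N + 1) → ∀ x ∈ t, x ∈ S := by
  intro t
  induction t with
  | nil => intro acc _ _ _ x hx; cases hx
  | cons v t ih =>
    intro acc hok hacc hb x hx
    obtain ⟨hcond, hok'⟩ := hok
    have hvb := hb v List.mem_cons_self
    have hvS : v ∈ S := by
      rw [hiff v hvb.1 hvb.2]
      rcases hcond with hz | ⟨hne, hsub⟩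
      · rw [pvPushes_start N D graph parent w S v hSb hvb.1 hvb.2 hz, pvTarget, if_pos hz]
      · have hdeg : pvDegN N graph v ≠ 0 := by
          intro h
          exact hne ((pvP_nil_iff N D graph parent w v hvb.1 hvb.2).mpr h)
        have hpd := pvParentDeg N D graph parent w v hvb.1 hvb.2
        have hz : ¬ PySem.List.pyGetD parent v 0 = 0 := by
          rw [hpd]
          simpa using hdeg
        have hfull := pvSumS_full N D graph parent S v hS hSb (fun u hu0 hu1 hcnt => by
          apply hacc
          apply hsub
          exact (pvP_mem N D graph parent w v hvb.1 hvb.2 u).mpr ⟨hu0, hu1, hcnt⟩)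
        rw [pvPushes, if_neg hz, pvTarget, if_neg hz, hfull, hpd]
        omega
    rcases List.mem_cons.mp hx with hxv | hxt
    · exact hxv ▸ hvS
    · exact ih (acc ++ [v]) hok'
        (fun y hy => by
          rcases List.mem_append.mp hy with h | h
          · exact hacc y h
          · simp only [List.mem_singleton] at h; exact h ▸ hvS)
        (fun y hy => hb y (List.mem_cons_of_mem _ hy)) x hxt

theorem pvStepA_nofire (N : Int) (D : List Int) (graph : List (List Int)) (parent : List Int)
    (retB L : List Int) (S : List Int) (t0 : Int) (ret par : List Int)
    (heap : List (Int × Int)) (m : Int × Int)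
    (w : PvWF N D graph parent)
    (hinv : pvAInv N D graph parent retB L S t0 ret par heap)
    (hm : m ∈ heap) (hmin : ∀ e ∈ heap, m.1 ≤ e.1)
    (hnf : ¬ (PySem.List.pyGetD par m.2 0 - 1 ≤ 0)) :
    pvAInv N D graph parent retB L S m.1 ret
      (PySem.List.pySetD par m.2 (PySem.List.pyGetD par m.2 0 - 1)) (heap.erase m) := by
  obtain ⟨c1, c2, c3, c4, c5, c6, c7, c8, c9, c10, c11, c12⟩ := hinv
  have hvb := c10 m hm
  have hv0 : (0:Int) ≤ m.2 := hvb.1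
  have hv1 : m.2 < N + 1 := hvb.2.1
  have ht0 : t0 ≤ m.1 := hvb.2.2
  have hparlen : (m.2 : Int) < par.length := by rw [c4]; omega
  have hget : ∀ x : Int, 0 ≤ x →
      PySem.List.pyGetD (PySem.List.pySetD par m.2 (PySem.List.pyGetD par m.2 0 - 1)) x 0 =
        if x = m.2 then PySem.List.pyGetD par m.2 0 - 1 else PySem.List.pyGetD par x 0 :=
    fun x hx => pvGetSet par m.2 x _ 0 hv0 hparlen hx
  have hce : ∀ v : Int, pvHCnt heap v = pvHCnt (heap.erase m) v + (if m.2 = v then 1 else 0) :=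
    pvHCnt_erase heap m hm
  refine ⟨c1, c2, c3, by rw [PySem.List.length_pySetD]; exact c4, c5, c6, ?_, ?_, ?_, ?_, ?_, ?_⟩
  · intro v h0 h1
    rw [hget v h0]
    have h7 := c7 v h0 h1
    have hc := hce v
    by_cases hv : v = m.2
    · subst hv
      rw [if_pos rfl]
      rw [if_pos rfl] at hc
      omega
    · rw [if_neg hv]
      rw [if_neg (fun h => hv h.symm)] at hc
      omega
  · intro v h0 h1
    have := c8 v h0 h1
    have hc := hce v
    by_cases hv : m.2 = v
    · rw [if_pos hv] at hc
      subst hv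
      have hvS : m.2 ∉ S := by
        intro hvS
        have h9 := (c9 m.2 h0 h1).mp hvS
        have hle := pvPushes_le N D graph parent w S m.2 c1 (fun u hu => ⟨(c2 u hu).1, (c2 u hu).2.1⟩) h0 h1
        have hpos := pvHCnt_pos heap m hm
        omega
      omega
    · rw [if_neg hv] at hc
      omega
  · intro v h0 h1
    have h9 := c9 v h0 h1
    have hc := hce v
    have h7 := c7 v h0 h1
    by_cases hv : m.2 = v
    · subst hv
      rw [if_pos rfl] at hc
      have h7v := c7 m.2 hv0 hv1
      constructor
      · intro hvS
        have hle := pvPushes_le N D graph parent w S m.2 c1 (fun u hu => ⟨(c2 u hu).1, (c2 u hu).2.1⟩) h0 h1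
        have hpos := pvHCnt_pos heap m hm
        have := h9.mp hvS
        omega
      · intro heq
        exfalso
        apply hnf
        have htar : 1 ≤ pvTarget parent m.2 := by
          rw [pvTarget]
          by_cases hz : PySem.List.pyGetD parent m.2 0 = 0
          · rw [if_pos hz]
          · rw [if_neg hz]
            have hpd := pvParentDeg N D graph parent w m.2 hv0 hv1
            omega
        have hle := pvPushes_le N D graph parent w S m.2 c1 (fun u hu => ⟨(c2 u hu).1, (c2 u hu).2.1⟩) h0 h1
        have h8 := c8 m.2 hv0 hv1
        rw [pvTarget] at heq htar hle
        by_cases hz : PySem.List.pyGetD parent m.2 0 = 0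
        · rw [if_pos hz] at heq htar hle
          omega
        · rw [if_neg hz] at heq htar hle
          omega
    · rw [if_neg hv] at hc
      have : pvHCnt (heap.erase m) v = pvHCnt heap v := by omega
      rw [this]
      exact h9
  · intro e he
    have hem := List.mem_of_mem_erase he
    have := c10 e hem
    exact ⟨this.1, this.2.1, hmin e hem⟩
  · intro e he
    exact c11 e (List.mem_of_mem_erase he)
  · intro v h0 h1 u hu hvu
    rcases c12 v h0 h1 u hu hvu with hle | hmem
    · exact Or.inl (le_trans hle ht0)
    · by_cases heq : (PySem.List.pyGetD retB u 0 + pvD D v, v) = m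
      · left
        have : PySem.List.pyGetD retB u 0 + pvD D v = m.1 := by rw [← heq]
        omega
      · right
        exact (List.mem_erase_of_ne heq).mpr hmem

theorem pvStepA_fire (N : Int) (D : List Int) (graph : List (List Int)) (parent : List Int)
    (retB L : List Int) (S : List Int) (t0 : Int) (ret par : List Int)
    (heap : List (Int × Int)) (m : Int × Int)
    (w : PvWF N D graph parent)
    (hLval : ∀ v ∈ L, PySem.List.pyGetD retB v 0 =
      pvMaxD ((pvP graph N v).map (fun u => PySem.List.pyGetD retB u 0)) + pvD D v)
    (hLcomp : ∀ v : Int, 0 ≤ v → v < N + 1 →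
      (PySem.List.pyGetD parent v 0 = 0 ∨
        (pvP graph N v ≠ [] ∧ ∀ u ∈ pvP graph N v, u ∈ L)) → v ∈ L)
    (hinv : pvAInv N D graph parent retB L S t0 ret par heap)
    (hm : m ∈ heap) (hmin : ∀ e ∈ heap, m.1 ≤ e.1)
    (hf : PySem.List.pyGetD par m.2 0 - 1 ≤ 0) :
    m.2 ∉ S ∧ m.1 = PySem.List.pyGetD retB m.2 0 ∧
    pvAInv N D graph parent retB L (S ++ [m.2]) m.1
      (PySem.List.pySetD ret m.2 m.1)
      (PySem.List.pySetD par m.2 (PySem.List.pyGetD par m.2 0 - 1))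
      ((heap.erase m) ++ (pvGA graph m.2).map (fun c => (m.1 + pvD D c, c))) := by
  obtain ⟨c1, c2, c3, c4, c5, c6, c7, c8, c9, c10, c11, c12⟩ := hinv
  have hvb := c10 m hm
  have hv0 : (0:Int) ≤ m.2 := hvb.1
  have hv1 : m.2 < N + 1 := hvb.2.1
  have ht0 : t0 ≤ m.1 := hvb.2.2
  have hSb : ∀ u ∈ S, 0 ≤ u ∧ u < N + 1 := fun u hu => ⟨(c2 u hu).1, (c2 u hu).2.1⟩
  have hle := pvPushes_le N D graph parent w S m.2 c1 hSb hv0 hv1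
  have hpos := pvHCnt_pos heap m hm
  have h7 := c7 m.2 hv0 hv1
  have h8 := c8 m.2 hv0 hv1
  have h9 := c9 m.2 hv0 hv1
  have hpd := pvParentDeg N D graph parent w m.2 hv0 hv1
  have hvS : m.2 ∉ S := by
    intro hvS
    have := h9.mp hvS
    omega
  have hGAmem : pvGA graph m.2 ∈ graph := by
    apply pvGetMem
    · exact hv0
    · rw [w.hG]; omega
  have hkey : m.1 = PySem.List.pyGetD retB m.2 0 ∧ m.2 ∈ L ∧
      pvHCnt heap m.2 = 1 ∧ pvCnt graph m.2 m.2 = 0 ∧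
      pvPushes graph parent S m.2 = pvTarget parent m.2 := by
    by_cases hz : PySem.List.pyGetD parent m.2 0 = 0
    · have hdeg : pvDegN N graph m.2 = 0 := by omega
      have hps := pvPushes_start N D graph parent w S m.2 hSb hv0 hv1 hz
      have hcnt1 : pvHCnt heap m.2 = 1 := by omega
      have hcvv := pvDeg_zero_cnt N D graph parent w m.2 hdeg m.2 hv0 hv1
      have hmL : m.2 ∈ L := hLcomp m.2 hv0 hv1 (Or.inl hz)
      have hPnil : pvP graph N m.2 = [] :=
        (pvP_nil_iff N D graph parent w m.2 hv0 hv1).mpr hdeg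
      have hteq : m.1 = PySem.List.pyGetD retB m.2 0 := by
        rcases c11 m hm with ⟨_, ht⟩ | ⟨u, huS, hmem, _⟩
        · rw [hLval m.2 hmL, hPnil]
          simpa [pvMaxD] using ht
        · exfalso
          have hcu : pvCnt graph u m.2 ≠ 0 := by
            rw [pvCnt]
            have : 0 < (pvGA graph u).count m.2 := List.count_pos_iff.mpr hmem
            omega
          exact hcu (pvDeg_zero_cnt N D graph parent w m.2 hdeg u (hSb u huS).1 (hSb u huS).2)
      exact ⟨hteq, hmL, hcnt1, hcvv, by rw [hps, pvTarget, if_pos hz]⟩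
    · have hdeg : pvDegN N graph m.2 ≠ 0 := by
        intro h; rw [hpd] at hz; simp [h] at hz
      have htg : pvTarget parent m.2 = PySem.List.pyGetD parent m.2 0 := by
        rw [pvTarget, if_neg hz]
      have hcnt1 : pvHCnt heap m.2 = 1 := by omega
      have hpfull : pvPushes graph parent S m.2 = PySem.List.pyGetD parent m.2 0 := by omega
      have hsumfull : pvSumS graph S m.2 = pvDegN N graph m.2 := by
        rw [pvPushes, if_neg hz] at hpfull
        omega
      have hclosed : ∀ u : Int, 0 ≤ u → u < N + 1 → pvCnt graph u m.2 ≠ 0 → u ∈ S := by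
        intro u hu0 hu1 hcu
        exact pvSum_support S (pvRangeN N) (fun x => pvCnt graph x m.2) c1 (pvNodup_rangeN N)
          (fun x hx => (pvMem_rangeN N x).mpr ⟨(hSb x hx).1, (hSb x hx).2⟩)
          (by rw [← pvSumS, ← pvDegN] at *; exact hsumfull)
          u ((pvMem_rangeN N u).mpr ⟨hu0, hu1⟩) hcu
      have hcvv : pvCnt graph m.2 m.2 = 0 := by
        by_contra hcv
        exact hvS (hclosed m.2 hv0 hv1 hcv)
      have hPne : pvP graph N m.2 ≠ [] := by
        intro h
        exact hdeg ((pvP_nil_iff N D graph parent w m.2 hv0 hv1).mp h)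
      have hPsubL : ∀ u ∈ pvP graph N m.2, u ∈ L := by
        intro u hu
        have hub := (pvP_mem N D graph parent w m.2 hv0 hv1 u).mp hu
        exact (c2 u (hclosed u hub.1 hub.2.1 hub.2.2)).2.2
      have hmL : m.2 ∈ L := hLcomp m.2 hv0 hv1 (Or.inr ⟨hPne, hPsubL⟩)
      have hjust : ∃ u ∈ S, m.2 ∈ pvGA graph u ∧
          m.1 = PySem.List.pyGetD retB u 0 + pvD D m.2 := by
        rcases c11 m hm with ⟨hz', _⟩ | h
        · exact absurd hz' hz
        · exact h
      obtain ⟨u0, hu0S, hmem0, ht0eq⟩ := hjust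
      have hu0P : u0 ∈ pvP graph N m.2 := by
        apply (pvP_mem N D graph parent w m.2 hv0 hv1 u0).mpr
        refine ⟨(hSb u0 hu0S).1, (hSb u0 hu0S).2, ?_⟩
        rw [pvCnt]
        have : 0 < (pvGA graph u0).count m.2 := List.count_pos_iff.mpr hmem0
        omega
      have hmapne : (pvP graph N m.2).map (fun u => PySem.List.pyGetD retB u 0) ≠ [] := by
        simpa using hPne
      obtain ⟨u1, hu1P, hmax1⟩ := List.mem_map.mp
        (pvMaxD_mem ((pvP graph N m.2).map (fun u => PySem.List.pyGetD retB u 0)) hmapne)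
      have hu1b := (pvP_mem N D graph parent w m.2 hv0 hv1 u1).mp hu1P
      have hu1S : u1 ∈ S := hclosed u1 hu1b.1 hu1b.2.1 hu1b.2.2
      have hu1mem : m.2 ∈ pvGA graph u1 := by
        rw [pvCnt] at hu1b
        exact List.count_pos_iff.mp (by omega)
      have hXle : PySem.List.pyGetD retB u1 0 + pvD D m.2 ≤ m.1 := by
        rcases c12 m.2 hv0 hv1 u1 hu1S hu1mem with hle' | hmem'
        · omega
        · have : (PySem.List.pyGetD retB u1 0 + pvD D m.2, m.2) = m := by
            apply pvCountP_eq_one_unique heap (fun e => e.2 == m.2) hcnt1 hmem' hm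
            · simp
            · simp
          have := congrArg Prod.fst this
          simp at this
          omega
      have hMle : m.1 ≤ pvMaxD ((pvP graph N m.2).map (fun u => PySem.List.pyGetD retB u 0)) + pvD D m.2 := by
        have := pv_le_MaxD ((pvP graph N m.2).map (fun u => PySem.List.pyGetD retB u 0))
          (PySem.List.pyGetD retB u0 0) (List.mem_map.mpr ⟨u0, hu0P, rfl⟩)
        omega
      have hteq : m.1 = PySem.List.pyGetD retB m.2 0 := by
        rw [hLval m.2 hmL]
        omega
      exact ⟨hteq, hmL, hcnt1, hcvv, by omega⟩
  obtain ⟨hteq, hmL, hcnt1, hcvv, hpt⟩ := hkey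
  have hretlen : (m.2 : Int) < ret.length := by rw [c3]; omega
  have hparlen : (m.2 : Int) < par.length := by rw [c4]; omega
  have hgetr : ∀ x : Int, 0 ≤ x →
      PySem.List.pyGetD (PySem.List.pySetD ret m.2 m.1) x 0 =
        if x = m.2 then m.1 else PySem.List.pyGetD ret x 0 :=
    fun x hx => pvGetSet ret m.2 x _ 0 hv0 hretlen hx
  have hgetp : ∀ x : Int, 0 ≤ x →
      PySem.List.pyGetD (PySem.List.pySetD par m.2 (PySem.List.pyGetD par m.2 0 - 1)) x 0 =
        if x = m.2 then PySem.List.pyGetD par m.2 0 - 1 else PySem.List.pyGetD par x 0 :=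
    fun x hx => pvGetSet par m.2 x _ 0 hv0 hparlen hx
  have hce := pvHCnt_erase heap m hm
  have hc2 : ∀ v : Int,
      pvHCnt ((heap.erase m) ++ (pvGA graph m.2).map (fun c => (m.1 + pvD D c, c))) v
        = pvHCnt (heap.erase m) v + pvCnt graph m.2 v := by
    intro v
    rw [pvHCnt_append_map]
    rfl
  have hchild : ∀ c ∈ pvGA graph m.2, 1 ≤ c ∧ c ≤ N := fun c hc => w.hC _ hGAmem c hc
  refine ⟨hvS, hteq, ?_⟩
  refine ⟨?_, ?_, by rw [PySem.List.length_pySetD]; exact c3,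
    by rw [PySem.List.length_pySetD]; exact c4, ?_, ?_, ?_, ?_, ?_, ?_, ?_, ?_⟩
  · rw [List.nodup_append]
    exact ⟨c1, List.nodup_singleton _, fun a ha b hb => by
      simp only [List.mem_singleton] at hb
      subst hb
      exact fun h => hvS (h ▸ ha)⟩
  · intro v hv
    rcases List.mem_append.mp hv with h | h
    · exact c2 v h
    · simp only [List.mem_singleton] at h
      subst h
      exact ⟨hv0, hv1, hmL⟩
  · intro v hv
    rcases List.mem_append.mp hv with h | h
    · have hvb2 := c2 v h
      have hne : ¬ v = m.2 := fun he => hvS (he ▸ h)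
      rw [hgetr v hvb2.1, if_neg hne]
      exact c5 v h
    · simp only [List.mem_singleton] at h
      subst h
      rw [hgetr m.2 hv0, if_pos rfl]
      exact hteq
  · intro v h0 h1 hvS'
    have hne : ¬ v = m.2 := fun he => hvS' (List.mem_append.mpr (Or.inr (by simp [he])))
    rw [hgetr v h0, if_neg hne]
    exact c6 v h0 h1 (fun h => hvS' (List.mem_append.mpr (Or.inl h)))
  · intro v h0 h1
    rw [hgetp v h0, pvPushes_append, hc2 v]
    have hcev := hce v
    have h7v := c7 v h0 h1
    by_cases hv : v = m.2
    · subst hv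
      rw [if_pos rfl]
      rw [if_pos rfl] at hcev
      rw [hcvv]
      push_cast
      omega
    · rw [if_neg hv]
      rw [if_neg (fun h => hv h.symm)] at hcev
      push_cast
      omega
  · intro v h0 h1
    rw [pvPushes_append, hc2 v]
    have hcev := hce v
    have h8v := c8 v h0 h1
    by_cases hv : v = m.2
    · subst hv
      rw [if_pos rfl] at hcev
      rw [hcvv]
      push_cast
      omega
    · rw [if_neg (fun h => hv h.symm)] at hcev
      push_cast
      omega
  · intro v h0 h1
    rw [pvPushes_append, hc2 v]
    have hcev := hce v
    have h9v := c9 v h0 h1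
    by_cases hv : v = m.2
    · subst hv
      rw [if_pos rfl] at hcev
      rw [hcvv]
      constructor
      · intro _
        push_cast
        omega
      · intro _
        exact List.mem_append.mpr (Or.inr (by simp))
    · rw [if_neg (fun h => hv h.symm)] at hcev
      have hmemiff : v ∈ S ++ [m.2] ↔ v ∈ S := by
        simp only [List.mem_append, List.mem_singleton]
        constructor
        · rintro (h | h)
          · exact h
          · exact absurd h hv
        · exact Or.inl
      rw [hmemiff]
      rw [h9v]
      constructor <;> intro h <;> push_cast at * <;> omega
  · intro e he
    rcases List.mem_append.mp he with h | h
    · have hem := List.mem_of_mem_erase h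
      have := c10 e hem
      exact ⟨this.1, this.2.1, hmin e hem⟩
    · obtain ⟨c, hcm, rfl⟩ := List.mem_map.mp h
      have hcb := hchild c hcm
      have hdn := pvD_nonneg N D graph parent w c (by omega) (by omega)
      exact ⟨by simp; omega, by simp; omega, by simp; omega⟩
  · intro e he
    rcases List.mem_append.mp he with h | h
    · rcases c11 e (List.mem_of_mem_erase h) with hl | ⟨u, huS, hmem, heq⟩
      · exact Or.inl hl
      · exact Or.inr ⟨u, List.mem_append.mpr (Or.inl huS), hmem, heq⟩
    · obtain ⟨c, hcm, rfl⟩ := List.mem_map.mp h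
      refine Or.inr ⟨m.2, List.mem_append.mpr (Or.inr (by simp)), by simpa using hcm, ?_⟩
      simp
      omega
  · intro v h0 h1 u hu hvu
    rcases List.mem_append.mp hu with huS | huv
    · rcases c12 v h0 h1 u huS hvu with hle' | hmem'
      · exact Or.inl (by omega)
      · by_cases heq : (PySem.List.pyGetD retB u 0 + pvD D v, v) = m
        · left
          have := congrArg Prod.fst heq
          simp at this
          omega
        · right
          exact List.mem_append.mpr (Or.inl ((List.mem_erase_of_ne heq).mpr hmem'))
    · simp only [List.mem_singleton] at huv
      subst huv
      right
      apply List.mem_append.mpr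
      right
      apply List.mem_map.mpr
      exact ⟨v, hvu, by rw [← hteq]⟩

theorem pvASim (N : Int) (D : List Int) (graph : List (List Int)) (parent : List Int)
    (retB L : List Int)
    (w : PvWF N D graph parent)
    (hBlen : retB.length = (N + 1).toNat)
    (hLb : ∀ v ∈ L, 0 ≤ v ∧ v < N + 1)
    (hLok : pvOk N graph parent [] L)
    (hLval : ∀ v ∈ L, PySem.List.pyGetD retB v 0 =
      pvMaxD ((pvP graph N v).map (fun u => PySem.List.pyGetD retB u 0)) + pvD D v)
    (hLzero : ∀ v : Int, 0 ≤ v → v < N + 1 → v ∉ L → PySem.List.pyGetD retB v 0 = 0)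
    (hLcomp : ∀ v : Int, 0 ≤ v → v < N + 1 →
      (PySem.List.pyGetD parent v 0 = 0 ∨
        (pvP graph N v ≠ [] ∧ ∀ u ∈ pvP graph N v, u ∈ L)) → v ∈ L) :
    ∀ (fuel : Nat) (S : List Int) (t0 : Int) (ret par : List Int) (heap : List (Int × Int)),
      pvAInv N D graph parent retB L S t0 ret par heap →
      pvMeasure N graph S heap < fuel →
      pvLoopA D graph fuel ret par heap = retB := by
  intro fuel
  induction fuel with
  | zero => intro S t0 ret par heap _ hms; omega
  | succ fuel ih =>
    intro S t0 ret par heap hinv hms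
    cases heap with
    | nil =>
      have hred : pvLoopA D graph (fuel + 1) ret par [] = ret := rfl
      rw [hred]
      obtain ⟨c1, c2, c3, c4, c5, c6, c7, c8, c9, c10, c11, c12⟩ := hinv
      have hSb : ∀ u ∈ S, 0 ≤ u ∧ u < N + 1 := fun u hu => ⟨(c2 u hu).1, (c2 u hu).2.1⟩
      have hiff : ∀ v : Int, 0 ≤ v → v < N + 1 →
          (v ∈ S ↔ pvPushes graph parent S v = pvTarget parent v) := by
        intro v h0 h1
        have := c9 v h0 h1
        have hz : pvHCnt [] v = 0 := rfl
        rw [hz] at this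
        simpa using this
      have hSL : ∀ x ∈ L, x ∈ S :=
        pvOk_sub N D graph parent w S c1 hSb hiff L [] hLok (by intro x hx; cases hx) hLb
      apply List.ext_getElem (by rw [c3, hBlen])
      intro i hi1 hi2
      have hib0 : (0:Int) ≤ (i : Int) := by omega
      have hib1 : (i : Int) < N + 1 := by
        rw [c3] at hi1
        omega
      rw [← pvGetNat ret i hi1, ← pvGetNat retB i hi2]
      by_cases hiS : (i : Int) ∈ S
      · exact c5 _ hiS
      · have hiL : (i : Int) ∉ L := fun h => hiS (hSL _ h)
        rw [c6 _ hib0 hib1 hiS, hLzero _ hib0 hib1 hiL]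
    | cons x xs =>
      have hmem : pvHeapMin x xs ∈ x :: xs := by
        rcases pvHeapMin_mem xs x with h | h
        · rw [h]; exact List.mem_cons_self
        · exact List.mem_cons_of_mem _ h
      have hmin : ∀ e ∈ x :: xs, (pvHeapMin x xs).1 ≤ e.1 := by
        intro e he
        apply pvHeapMin_fst_le xs x e
        rcases List.mem_cons.mp he with h | h
        · exact Or.inl h
        · exact Or.inr h
      obtain ⟨c1, c2, c3, c4, c5, c6, c7, c8, c9, c10, c11, c12⟩ := hinv
      have hinv2 : pvAInv N D graph parent retB L S t0 ret par (x :: xs) :=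
        ⟨c1, c2, c3, c4, c5, c6, c7, c8, c9, c10, c11, c12⟩
      have hvb := c10 _ hmem
      have hparlen : ((pvHeapMin x xs).2 : Int) < par.length := by
        rw [c4]
        have := hvb.2.1
        omega
      have hpar1 : PySem.List.pyGetD
          (PySem.List.pySetD par (pvHeapMin x xs).2
            (PySem.List.pyGetD par (pvHeapMin x xs).2 0 - 1)) (pvHeapMin x xs).2 0 =
          PySem.List.pyGetD par (pvHeapMin x xs).2 0 - 1 := by
        rw [pvGetSet par _ _ _ 0 hvb.1 hparlen hvb.1, if_pos rfl]
      show (if PySem.List.pyGetD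
          (PySem.List.pySetD par (pvHeapMin x xs).2
            (PySem.List.pyGetD par (pvHeapMin x xs).2 0 - 1)) (pvHeapMin x xs).2 0 ≤ 0 then _ else _) = retB
      rw [hpar1]
      have hmrange : (pvHeapMin x xs).2 ∈ pvRangeN N :=
        (pvMem_rangeN N _).mpr ⟨hvb.1, hvb.2.1⟩
      have hfsum := pvFilterSum (fun w => (pvGA graph w).length) (pvHeapMin x xs).2
        (pvRangeN N) (pvNodup_rangeN N) hmrange S
      by_cases hfire : PySem.List.pyGetD par (pvHeapMin x xs).2 0 - 1 ≤ 0
      · rw [if_pos hfire]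
        obtain ⟨hvS, hteq, hinv'⟩ := pvStepA_fire N D graph parent retB L S t0 ret par
          (x :: xs) (pvHeapMin x xs) w hLval hLcomp hinv2 hmem hmin hfire
        have hms' : pvMeasure N graph (S ++ [(pvHeapMin x xs).2])
            (((x :: xs).erase (pvHeapMin x xs)) ++
              (pvGA graph (pvHeapMin x xs).2).map
                (fun c => ((pvHeapMin x xs).1 + pvD D c, c))) < fuel := by
          rw [pvMeasure] at hms ⊢
          rw [List.length_append, List.length_map, List.length_erase_of_mem hmem]
          rw [hfsum hvS] at hms
          have hlp : 1 ≤ (x :: xs).length := by simp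
          omega
        have := ih (S ++ [(pvHeapMin x xs).2]) (pvHeapMin x xs).1
          (PySem.List.pySetD ret (pvHeapMin x xs).2 (pvHeapMin x xs).1)
          (PySem.List.pySetD par (pvHeapMin x xs).2
            (PySem.List.pyGetD par (pvHeapMin x xs).2 0 - 1))
          (((x :: xs).erase (pvHeapMin x xs)) ++
            (pvGA graph (pvHeapMin x xs).2).map
              (fun c => ((pvHeapMin x xs).1 + pvD D c, c))) hinv' hms'
        rw [PySem.List.foldl_append_singleton_eq_map]
        exact this
      · rw [if_neg hfire]
        have hinv' := pvStepA_nofire N D graph parent retB L S t0 ret par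
          (x :: xs) (pvHeapMin x xs) w hinv2 hmem hmin hfire
        have hms' : pvMeasure N graph S ((x :: xs).erase (pvHeapMin x xs)) < fuel := by
          rw [pvMeasure] at hms ⊢
          rw [List.length_erase_of_mem hmem]
          have hlp : 1 ≤ (x :: xs).length := by simp
          omega
        have := ih S (pvHeapMin x xs).1 ret
          (PySem.List.pySetD par (pvHeapMin x xs).2
            (PySem.List.pyGetD par (pvHeapMin x xs).2 0 - 1))
          ((x :: xs).erase (pvHeapMin x xs)) hinv' hms'
        exact this

theorem pvStartFold : ∀ (l : List (Int × Int)) (acc : List Int),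
    l.foldl (fun acc ip => if ip.2 = 0 then acc ++ [ip.1] else acc) acc
      = acc ++ (l.filter (fun ip => ip.2 == 0)).map Prod.fst := by
  intro l
  induction l with
  | nil => intro acc; simp
  | cons a l ih =>
    intro acc
    simp only [List.foldl_cons, List.filter_cons]
    by_cases h : a.2 = 0
    · rw [if_pos h, if_pos (by simpa using h), ih]
      simp
    · rw [if_neg h, if_neg (by simpa using h), ih]

theorem pvHCnt_map (D : List Int) (l : List Int) (v : Int) :
    pvHCnt (l.map (fun s => (PySem.List.pyGetD D (s - 1) 0, s))) v = l.count v := by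
  rw [pvHCnt, List.countP_map]
  rfl

theorem pvFoldAdd {α : Type} (f : α → Nat) :
    ∀ (l : List α) (init : Nat), l.foldl (fun a x => a + f x) init = init + (l.map f).sum := by
  intro l
  induction l with
  | nil => intro init; simp
  | cons a l ih =>
    intro init
    simp only [List.foldl_cons, List.map_cons, List.sum_cons]
    rw [ih]
    omega

theorem pvLoopA_nil (D : List Int) (graph : List (List Int)) :
    ∀ (fuel : Nat) (ret par : List Int), pvLoopA D graph fuel ret par [] = ret := by
  intro fuel ret par
  cases fuel <;> rfl

theorem pvLoopB_nil (D : List Int) (graph : List (List Int)) :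
    ∀ (fuel : Nat) (indeg best ret : List Int),
      pvLoopB D graph fuel indeg best ret [] = ret := by
  intro fuel indeg best ret
  cases fuel <;> rfl

theorem pvRange_len_parent (N : Int) (D : List Int) (graph : List (List Int)) (parent : List Int)
    (w : PvWF N D graph parent) :
    PySem.List.pyRange 0 (PySem.List.len parent) 1 = pvRangeN N := by
  rw [pvRangeN]
  congr 1
  have := w.hP
  simp [PySem.List.len]
  omega

theorem pvStart_eq (N : Int) (D : List Int) (graph : List (List Int)) (parent : List Int)
    (w : PvWF N D graph parent) :
    (PySem.List.enumerate parent 0).foldl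
        (fun acc ip => if ip.2 = 0 then acc ++ [ip.1] else acc) []
      = (pvRangeN N).filter (fun j => PySem.List.pyGetD parent j 0 == 0) := by
  rw [pvStartFold]
  rw [PySem.List.enumerate_eq_map_pyRange parent 0]
  rw [pvRange_len_parent N D graph parent w]
  rw [List.filter_map, List.map_map]
  simp only [List.nil_append]
  have : ((fun (ip : Int × Int) => ip.2 == 0) ∘ fun j => (j, PySem.List.pyGetD parent j 0)) =
      fun j => PySem.List.pyGetD parent j 0 == 0 := rfl
  rw [this]
  have : (Prod.fst ∘ fun (j : Int) => (j, PySem.List.pyGetD parent j 0)) = id := rfl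
  rw [this, List.map_id]

theorem pvInit (N : Int) (D : List Int) (graph : List (List Int)) (parent : List Int)
    (retB L : List Int) (w : PvWF N D graph parent) :
    pvAInv N D graph parent retB L [] 0 (List.replicate (N + 1).toNat 0) parent
      (((pvRangeN N).filter (fun j => PySem.List.pyGetD parent j 0 == 0)).map
        (fun s => (PySem.List.pyGetD D (s - 1) 0, s))) := by
  have hstartmem : ∀ s : Int,
      s ∈ (pvRangeN N).filter (fun j => PySem.List.pyGetD parent j 0 == 0) ↔
        (0 ≤ s ∧ s < N + 1 ∧ PySem.List.pyGetD parent s 0 = 0) := by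
    intro s
    rw [List.mem_filter, pvMem_rangeN]
    simp [and_assoc]
  have hnodup : ((pvRangeN N).filter (fun j => PySem.List.pyGetD parent j 0 == 0)).Nodup :=
    (pvNodup_rangeN N).filter _
  have hcnt0 : ∀ v : Int, 0 ≤ v → v < N + 1 →
      (pvHCnt (((pvRangeN N).filter (fun j => PySem.List.pyGetD parent j 0 == 0)).map
        (fun s => (PySem.List.pyGetD D (s - 1) 0, s))) v : Int)
        = (if PySem.List.pyGetD parent v 0 = 0 then 1 else 0) := by
    intro v h0 h1
    rw [pvHCnt_map]
    by_cases hz : PySem.List.pyGetD parent v 0 = 0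
    · rw [if_pos hz]
      have hmem : v ∈ (pvRangeN N).filter (fun j => PySem.List.pyGetD parent j 0 == 0) :=
        (hstartmem v).mpr ⟨h0, h1, hz⟩
      rw [List.count_eq_one_of_mem hnodup hmem]
      rfl
    · rw [if_neg hz]
      have : v ∉ (pvRangeN N).filter (fun j => PySem.List.pyGetD parent j 0 == 0) :=
        fun h => hz ((hstartmem v).mp h).2.2
      rw [List.count_eq_zero.mpr this]
      rfl
  have hpush0 : ∀ v : Int, pvPushes graph parent [] v =
      (if PySem.List.pyGetD parent v 0 = 0 then 1 else 0) := by
    intro v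
    rw [pvPushes, pvSumS]
    simp
  have htar1 : ∀ v : Int, 0 ≤ v → v < N + 1 → 1 ≤ pvTarget parent v := by
    intro v h0 h1
    rw [pvTarget]
    by_cases hz : PySem.List.pyGetD parent v 0 = 0
    · rw [if_pos hz]
    · rw [if_neg hz]
      have := pvParentDeg N D graph parent w v h0 h1
      omega
  unfold pvAInv
  have k2 : ∀ v ∈ ([] : List Int), 0 ≤ v ∧ v < N + 1 ∧ v ∈ L := by intro v hv; cases hv
  have k3 : (List.replicate (N + 1).toNat (0:Int)).length = (N + 1).toNat := by simp
  have k4 : parent.length = (N + 1).toNat := by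
    have := w.hP
    omega
  have k5 : ∀ v ∈ ([] : List Int),
      PySem.List.pyGetD (List.replicate (N + 1).toNat (0:Int)) v 0 = PySem.List.pyGetD retB v 0 := by
    intro v hv; cases hv
  have k6 : ∀ v : Int, 0 ≤ v → v < N + 1 → v ∉ ([] : List Int) →
      PySem.List.pyGetD (List.replicate (N + 1).toNat (0:Int)) v 0 = 0 := by
    intro v h0 h1 _
    rw [PySem.List.pyGetD_eq_getElem _ 0 h0 (by simp; omega)]
    simp
  have k7 : ∀ v : Int, 0 ≤ v → v < N + 1 →
      PySem.List.pyGetD parent v 0 =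
        PySem.List.pyGetD parent v 0 - pvPushes graph parent [] v +
          (pvHCnt (((pvRangeN N).filter (fun j => PySem.List.pyGetD parent j 0 == 0)).map
            (fun s => (PySem.List.pyGetD D (s - 1) 0, s))) v : Int) := by
    intro v h0 h1
    rw [hpush0 v, hcnt0 v h0 h1]
    omega
  have k8 : ∀ v : Int, 0 ≤ v → v < N + 1 →
      0 ≤ pvPushes graph parent [] v -
        (pvHCnt (((pvRangeN N).filter (fun j => PySem.List.pyGetD parent j 0 == 0)).map
          (fun s => (PySem.List.pyGetD D (s - 1) 0, s))) v : Int) := by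
    intro v h0 h1
    rw [hpush0 v, hcnt0 v h0 h1]
    omega
  have k9 : ∀ v : Int, 0 ≤ v → v < N + 1 →
      (v ∈ ([] : List Int) ↔ pvPushes graph parent [] v -
        (pvHCnt (((pvRangeN N).filter (fun j => PySem.List.pyGetD parent j 0 == 0)).map
          (fun s => (PySem.List.pyGetD D (s - 1) 0, s))) v : Int) = pvTarget parent v) := by
    intro v h0 h1
    rw [hpush0 v, hcnt0 v h0 h1]
    constructor
    · intro h; cases h
    · intro h
      have := htar1 v h0 h1
      omega
  have k10 : ∀ e ∈ ((pvRangeN N).filter (fun j => PySem.List.pyGetD parent j 0 == 0)).map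
      (fun s => (PySem.List.pyGetD D (s - 1) 0, s)), 0 ≤ e.2 ∧ e.2 < N + 1 ∧ (0:Int) ≤ e.1 := by
    intro e he
    obtain ⟨s, hs, rfl⟩ := List.mem_map.mp he
    have hsb := (hstartmem s).mp hs
    refine ⟨by simpa using hsb.1, by simpa using hsb.2.1, ?_⟩
    simp only
    exact pvD_nonneg N D graph parent w s hsb.1 hsb.2.1
  have k11 : ∀ e ∈ ((pvRangeN N).filter (fun j => PySem.List.pyGetD parent j 0 == 0)).map
      (fun s => (PySem.List.pyGetD D (s - 1) 0, s)),
      (PySem.List.pyGetD parent e.2 0 = 0 ∧ e.1 = pvD D e.2) ∨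
        (∃ u ∈ ([] : List Int), e.2 ∈ pvGA graph u ∧
          e.1 = PySem.List.pyGetD retB u 0 + pvD D e.2) := by
    intro e he
    obtain ⟨s, hs, rfl⟩ := List.mem_map.mp he
    have hsb := (hstartmem s).mp hs
    exact Or.inl ⟨by simpa using hsb.2.2, rfl⟩
  have k12 : ∀ v : Int, 0 ≤ v → v < N + 1 → ∀ u ∈ ([] : List Int), v ∈ pvGA graph u →
      (PySem.List.pyGetD retB u 0 + pvD D v ≤ (0:Int) ∨
        (PySem.List.pyGetD retB u 0 + pvD D v, v) ∈
          ((pvRangeN N).filter (fun j => PySem.List.pyGetD parent j 0 == 0)).map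
            (fun s => (PySem.List.pyGetD D (s - 1) 0, s))) := by
    intro v _ _ u hu
    cases hu
  exact ⟨List.nodup_nil, k2, k3, k4, k5, k6, k7, k8, k9, k10, k11, k12⟩

theorem pvMeasure_init (N : Int) (D : List Int) (graph : List (List Int)) (parent : List Int)
    (w : PvWF N D graph parent) :
    pvMeasure N graph []
      (((pvRangeN N).filter (fun j => PySem.List.pyGetD parent j 0 == 0)).map
        (fun s => (PySem.List.pyGetD D (s - 1) 0, s))) < pvFuel N graph := by
  rw [pvMeasure, pvFuel]
  have h1 : (((pvRangeN N).filter (fun j => PySem.List.pyGetD parent j 0 == 0)).map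
      (fun s => (PySem.List.pyGetD D (s - 1) 0, s))).length ≤ (N + 1).toNat := by
    rw [List.length_map]
    calc ((pvRangeN N).filter _).length ≤ (pvRangeN N).length := List.length_filter_le _ _
      _ = (N + 1).toNat := pvLen_rangeN N
  have h2 : ((pvRangeN N).filter (fun w => !(([] : List Int).contains w))) = pvRangeN N := by
    apply List.filter_eq_self.mpr
    intro a _
    rfl
  rw [h2]
  have h3 : (pvRangeN N).map (fun w => (pvGA graph w).length) = graph.map List.length := by
    have hr : pvRangeN N = PySem.List.pyRange 0 (PySem.List.len graph) 1 := by
      rw [pvRangeN]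
      congr 1
      have := w.hG
      simp [PySem.List.len]
      omega
    have hmg : (pvRangeN N).map (fun w => pvGA graph w) = graph := by
      rw [hr]
      exact PySem.List.map_pyGetD_pyRange_zero graph []
    calc (pvRangeN N).map (fun w => (pvGA graph w).length)
        = ((pvRangeN N).map (fun w => pvGA graph w)).map List.length := by rw [List.map_map]; rfl
      _ = graph.map List.length := by rw [hmg]
  rw [h3]
  have h4 : graph.foldl (fun a l => a + l.length) 0 = (graph.map List.length).sum := by
    rw [pvFoldAdd List.length graph 0]
    omega
  omega

-- ===== VERDICT (by name: the statement is the Claim_ definition above) =====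
theorem top_sorting_spec : Claim_equal_top_sorting := by
  intro N D graph parent hdom hpre
  unfold Spec_top_sorting
  have hA : top_sorting N D graph parent =
      pvLoopA D graph (pvFuel N graph) (List.replicate (N + 1).toNat 0) parent
        (((PySem.List.enumerate parent 0).foldl
            (fun acc ip => if ip.2 = 0 then acc ++ [ip.1] else acc) []).foldl
          (fun h s => h ++ [(PySem.List.pyGetD D (s - 1) 0, s)]) []) := rfl
  have hB : top_sorting_alt N D graph parent =
      pvLoopB D graph ((N + 1).toNat + 1) parent (List.replicate (N + 1).toNat 0)
        (List.replicate (N + 1).toNat 0)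
        ((PySem.List.pyRange 0 (PySem.List.len parent) 1).filter
          (fun v => PySem.List.pyGetD parent v 0 == 0)) := rfl
  have hlenp : PySem.List.len parent = (parent.length : Int) := by
    simp [PySem.List.len]
  rcases hpre with htriv | hwf
  · -- parent has no zero entry: A builds no work list, B's queue is empty
    have hstart : (PySem.List.enumerate parent 0).foldl
        (fun acc ip => if ip.2 = 0 then acc ++ [ip.1] else acc) [] = [] := by
      rw [pvStartFold, PySem.List.enumerate_eq_map_pyRange parent 0]
      have hfil : ((PySem.List.pyRange 0 (PySem.List.len parent) 1).map
          (fun j => (j, PySem.List.pyGetD parent j 0))).filter (fun ip => ip.2 == 0) = [] := by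
        apply List.filter_eq_nil_iff.mpr
        intro a ha
        obtain ⟨j, hj, rfl⟩ := List.mem_map.mp ha
        have hjb := PySem.List.mem_pyRange_one.mp hj
        rw [hlenp] at hjb
        have hmem : PySem.List.pyGetD parent j 0 ∈ parent :=
          pvGetMem parent j 0 hjb.1 hjb.2
        simpa using htriv _ hmem
      rw [hfil]
      simp
    have hqueue : (PySem.List.pyRange 0 (PySem.List.len parent) 1).filter
        (fun v => PySem.List.pyGetD parent v 0 == 0) = [] := by
      apply List.filter_eq_nil_iff.mpr
      intro j hj
      have hjb := PySem.List.mem_pyRange_one.mp hj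
      rw [hlenp] at hjb
      have hmem : PySem.List.pyGetD parent j 0 ∈ parent :=
        pvGetMem parent j 0 hjb.1 hjb.2
      simpa using htriv _ hmem
    rw [hA, hB, hstart, hqueue]
    rw [show (([] : List Int).foldl
      (fun h s => h ++ [(PySem.List.pyGetD D (s - 1) 0, s)]) []) = [] from rfl]
    rw [pvLoopA_nil, pvLoopB_nil]
  · -- well-formed instance
    obtain ⟨hN, hD, hG, hP, hC, hDpos, hInd⟩ := hwf
    have w : PvWF N D graph parent := ⟨hN, hD, hG, hP, hC, hDpos, hInd⟩
    -- run B's loop: its output satisfies the fired-list characterisation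
    obtain ⟨L, i, b, hKfin⟩ := pvKRun N D graph parent w ((N + 1).toNat + 1) []
      ((pvRangeN N).filter (fun j => PySem.List.pyGetD parent j 0 == 0))
      parent (List.replicate (N + 1).toNat 0) (List.replicate (N + 1).toNat 0)
      (pvKInit N D graph parent w) (by simp)
    set retB := pvLoopB D graph ((N + 1).toNat + 1) parent (List.replicate (N + 1).toNat 0)
      (List.replicate (N + 1).toNat 0)
      ((pvRangeN N).filter (fun j => PySem.List.pyGetD parent j 0 == 0)) with hretB
    have hLnd : L.Nodup := by
      have := hKfin.nod
      simpa using this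
    have hLb : ∀ v ∈ L, 0 ≤ v ∧ v < N + 1 := by
      intro v hv
      exact hKfin.bnd v (List.mem_append_left _ hv)
    have hLval : ∀ v ∈ L, PySem.List.pyGetD retB v 0 =
        pvMaxD ((pvP graph N v).map (fun u => PySem.List.pyGetD retB u 0)) + pvD D v :=
      hKfin.rval
    have hLzero : ∀ v : Int, 0 ≤ v → v < N + 1 → v ∉ L → PySem.List.pyGetD retB v 0 = 0 :=
      hKfin.rzero
    have hLcomp : ∀ v : Int, 0 ≤ v → v < N + 1 →
        (PySem.List.pyGetD parent v 0 = 0 ∨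
          (pvP graph N v ≠ [] ∧ ∀ u ∈ pvP graph N v, u ∈ L)) → v ∈ L := by
      intro v h0 h1 hcond
      have hLsum : pvSumS graph L v = pvDegN N graph v := by
        rcases hcond with hz | ⟨hne, hsub⟩
        · have hpd := pvParentDeg N D graph parent w v h0 h1
          have hdeg : pvDegN N graph v = 0 := by omega
          have := pvSumS_le N D graph parent L v hLnd hLb
          have := pvSumS_zero N D graph parent w L v hLb hdeg
          omega
        · exact pvSumS_full N D graph parent L v hLnd hLb (fun u hu0 hu1 hcnt =>
            hsub u ((pvP_mem N D graph parent w v h0 h1 u).mpr ⟨hu0, hu1, hcnt⟩))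
      have := (hKfin.memiff v h0 h1).mpr hLsum
      simpa using this
    rw [hA, hB, pvRange_len_parent N D graph parent w, ← hretB]
    rw [pvStart_eq N D graph parent w, PySem.List.foldl_append_singleton_eq_map,
      List.nil_append]
    exact pvASim N D graph parent retB L w hKfin.lenr hLb hKfin.ok hLval hLzero hLcomp
      (pvFuel N graph) [] 0 _ parent _
      (pvInit N D graph parent retB L w) (pvMeasure_init N D graph parent w)
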